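-- pv_equiv track=rewrite | github.com/hinxx/uhvd-masc-firmware-decode | dsp56800e_decoder-3.py | derive_mappings
-- ===== SOURCE A (Python) =====
-- from collections import Counter
-- from typing import Iterable, Sequence
--
-- DEFAULT_NIBBLE_RANK = (0xF, 0x0, 0x1, 0x2, 0x4, 0x8, 0x6, 0xE,
--                        0x3, 0x5, 0x7, 0xA, 0x9, 0xC, 0xB, 0xD)
--
-- def derive_mappings(pair_rows: Sequence[tuple[int, int, int, int]],
--                     anchors: Iterable[tuple[int, int]] = (),
--                     nibble_order: tuple[int, int, int, int] = (0, 1, 2, 3),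
--                     rank: Sequence[int] = DEFAULT_NIBBLE_RANK,
--                     ) -> tuple[dict, dict, dict, dict]:
--     """Derive per-position pair-id → nibble mappings from anchors.
--
--     Args:
--         pair_rows: output of decode_pair_indices().
--         anchors: iterable of (codeword_index, expected_16bit_word_value).
--             Each anchor pins the four nibbles of the expected word at
--             their respective byte positions.
--         nibble_order: which nibble of the 16-bit output word each byte
--             position carries.  (0,1,2,3) means pos 0 → bits 15:12,
--             pos 1 → 11:8, pos 2 → 7:4, pos 3 → 3:0  (big-endian within
--             the word).  Use (3,2,1,0) for little-endian.
--         rank: tie-break order for nibbles not pinned by any anchor.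
--
--     Returns:
--         Tuple of 4 dicts (one per byte position), each mapping
--         pair-id (0..15) → nibble (0..15).
--
--     Raises:
--         ValueError on contradictory or infeasible anchors.
--     """
--     n = len(pair_rows)
--     cands = [{pid: set(range(16)) for pid in range(16)} for _ in range(4)]
--
--     # Apply anchors.
--     for cw, expected in anchors:
--         if not (0 <= cw < n):
--             raise IndexError(f"anchor codeword index {cw} out of range")
--         nibs = [(expected >> (12 - 4 * nibble_order[p])) & 0xF
--                 for p in range(4)]
--         for p in range(4):
--             pid = pair_rows[cw][p]
--             cands[p][pid] &= {nibs[p]}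
--             if not cands[p][pid]:
--                 raise ValueError(
--                     f"contradictory anchors at codeword {cw} position {p}")
--
--     # Bijection propagation: each nibble must appear in exactly one pair
--     # at each position.
--     changed = True
--     while changed:
--         changed = False
--         for p in range(4):
--             for pid, vs in cands[p].items():
--                 if len(vs) == 1:
--                     locked = next(iter(vs))
--                     for opid, ovs in cands[p].items():
--                         if opid != pid and locked in ovs:
--                             ovs.discard(locked)
--                             if not ovs:
--                                 raise ValueError(
--                                     f"no valid nibble for pair {opid} at "
--                                     f"position {p} after propagation")
--                             changed = True
--
--     # Frequency-based fallback for unresolved pairs.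
--     pos_freq = [Counter() for _ in range(4)]
--     for r in pair_rows:
--         for p in range(4):
--             pos_freq[p][r[p]] += 1
--
--     out = []
--     for p in range(4):
--         m = {pid: next(iter(vs)) for pid, vs in cands[p].items()
--              if len(vs) == 1}
--         used = set(m.values())
--         unresolved = sorted(
--             (pid for pid in range(16) if pid not in m),
--             key=lambda x: -pos_freq[p][x])
--         free_nibs = [n for n in rank if n not in used]
--         for pid, nb in zip(unresolved, free_nibs):
--             m[pid] = nb
--         out.append(m)
--     return tuple(out)
-- ===== SOURCE B (Python) =====
-- from collections import Counter
--
-- DEFAULT_NIBBLE_RANK = (0xF, 0x0, 0x1, 0x2, 0x4, 0x8, 0x6, 0xE,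
--                        0x3, 0x5, 0x7, 0xA, 0x9, 0xC, 0xB, 0xD)
--
-- def derive_mappings(pair_rows, anchors=(), nibble_order=(0, 1, 2, 3),
--                     rank=DEFAULT_NIBBLE_RANK):
--     """Direct construction: record the anchor-pinned nibble per (position,
--     pair-id) in one pass, complete the single forced pair when 15 nibbles
--     are taken, and fill the rest by the frequency/rank fallback — no
--     candidate sets, no fixpoint loop."""
--     n = len(pair_rows)
--     pins = [{} for _ in range(4)]
--     for cw, expected in anchors:
--         if not (0 <= cw < n):
--             raise IndexError(f"anchor codeword index {cw} out of range")
--         for p in range(4):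
--             pid = pair_rows[cw][p]
--             nib = (expected >> (12 - 4 * nibble_order[p])) & 0xF
--             if pins[p].setdefault(pid, nib) != nib:
--                 raise ValueError(f"contradictory anchors at codeword {cw} position {p}")
--     out = []
--     for p in range(4):
--         pin = pins[p]
--         used = set(pin.values())
--         if len(used) != len(pin):
--             raise ValueError(f"two pairs pinned to one nibble at position {p}")
--         if len(pin) == 15:
--             # a bijection forces the one remaining pair onto the unused nibble
--             missing_pid = next(i for i in range(16) if i not in pin)
--             missing_nib = next(v for v in range(16) if v not in used)
--             pin[missing_pid] = missing_nib
--             used.add(missing_nib)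
--         freq = Counter(r[p] for r in pair_rows)
--         m = {pid: pin[pid] for pid in range(16) if pid in pin}
--         unresolved = sorted((pid for pid in range(16) if pid not in pin),
--                             key=lambda x: -freq[x])
--         free_nibs = [nb for nb in rank if nb not in used]
--         for pid, nb in zip(unresolved, free_nibs):
--             m[pid] = nb
--         out.append(m)
--     return tuple(out)
-- ===== Notes on version B (the rewrite author's own statement) =====
-- stated objective: simpler
-- what changed: B drops A's per-position 16x16 candidate-set tables and the while-changed fixpoint propagation loop entirely: one pass over the anchors records the pinned pid->nibble map per position, the single pair forced by the bijection when 15 nibbles are taken is completed arithmetically, and the frequency/rank fallback is built straight from that partial map.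
import Mathlib
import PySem

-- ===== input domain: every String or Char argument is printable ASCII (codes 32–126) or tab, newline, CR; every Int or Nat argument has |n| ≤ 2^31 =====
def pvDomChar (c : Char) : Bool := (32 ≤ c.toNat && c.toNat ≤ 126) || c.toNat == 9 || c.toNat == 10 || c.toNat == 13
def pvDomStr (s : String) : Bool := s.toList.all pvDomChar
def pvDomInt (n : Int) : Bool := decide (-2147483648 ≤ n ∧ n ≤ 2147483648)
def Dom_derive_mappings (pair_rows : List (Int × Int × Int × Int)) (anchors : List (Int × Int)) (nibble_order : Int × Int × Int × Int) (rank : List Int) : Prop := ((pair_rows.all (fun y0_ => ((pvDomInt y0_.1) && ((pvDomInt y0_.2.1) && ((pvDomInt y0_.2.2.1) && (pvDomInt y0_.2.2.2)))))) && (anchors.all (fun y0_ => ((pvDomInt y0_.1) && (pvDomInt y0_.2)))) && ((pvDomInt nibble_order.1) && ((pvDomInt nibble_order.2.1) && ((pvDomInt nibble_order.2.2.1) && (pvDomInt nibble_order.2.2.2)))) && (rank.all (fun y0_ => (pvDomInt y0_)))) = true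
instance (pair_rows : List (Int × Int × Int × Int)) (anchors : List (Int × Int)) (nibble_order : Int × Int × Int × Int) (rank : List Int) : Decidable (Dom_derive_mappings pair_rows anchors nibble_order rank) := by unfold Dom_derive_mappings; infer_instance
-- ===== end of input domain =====

-- B replaces A's candidate-set fixpoint propagation by a direct one-pass construction of the
-- anchor-pinned partial assignment (objective: simpler). Equivalence is on return values on
-- inputs where A returns normally (Pre_ excludes exactly A's exception paths).

-- Helpers shared by both ports (both Pythons index 4-tuples, read pair_rows[cw] and
-- extract the anchor nibble with the same expression, and assign m[pid] = nb):
def pvTup4 (r : Int × Int × Int × Int) (p : Int) : Int :=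
  if p == 0 then r.1 else if p == 1 then r.2.1 else if p == 2 then r.2.2.1 else r.2.2.2

-- (expected >> (12 - 4*nibble_order[p])) & 0xF ; Python raises on a negative shift count,
-- which both ports test for explicitly (Pre_ excludes it), so .toNat is exact where used.
def pvNib (nibble_order : Int × Int × Int × Int) (e : Int) (p : Int) : Int :=
  PySem.Int.band (e >>> (12 - 4 * pvTup4 nibble_order p).toNat) 15

def pvRow (pair_rows : List (Int × Int × Int × Int)) (cw : Int) : Int × Int × Int × Int :=
  (PySem.List.pyGet? pair_rows cw).getD (0, 0, 0, 0)

-- m[pid] = nb on a dict rendered as an assoc list (overwrite in place, new key appends)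
def pvMInsert (m : List (Int × Int)) (k v : Int) : List (Int × Int) :=
  if m.any (fun e => e.1 == k) then m.map (fun e => if e.1 == k then (k, v) else e)
  else m ++ [(k, v)]

-- ===== PORT A =====
-- set(range(16))
def pvFull16 : List Int := [0, 1, 2, 3, 4, 5, 6, 7, 8, 9, 10, 11, 12, 13, 14, 15]

-- cands[p] is a dict pid -> candidate set, kept as an assoc list with fixed keys 0..15
def pvAGet (d : List (Int × List Int)) (k : Int) : Option (List Int) :=
  (d.find? (fun e => e.1 == k)).map (·.2)

def pvASet (d : List (Int × List Int)) (k : Int) (v : List Int) : List (Int × List Int) :=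
  d.map (fun e => if e.1 == k then (k, v) else e)

def pvInitCands : List (List (Int × List Int)) :=
  (PySem.List.pyRange 0 4 1).map (fun _ => (PySem.List.pyRange 0 16 1).map (fun pid => (pid, pvFull16)))

-- body of the anchor loop for one byte position p (cands[p][pid] &= {nibs[p]})
def pvAnchorPos (pair_rows : List (Int × Int × Int × Int)) (a : Int × Int) (nibs : List Int)
    (pos : List (Int × List Int)) (p : Int) : Option (List (Int × List Int)) :=
  let pid := pvTup4 (pvRow pair_rows a.1) p
  match pvAGet pos pid with
  | none => none                                 -- KeyError: pid not in 0..15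
  | some vs =>
    let vs' := vs.filter (fun x => x == nibs.getD p.toNat 0)
    if vs'.length == 0 then none                 -- contradictory anchors
    else some (pvASet pos pid vs')

-- one anchor (cw, expected); none = IndexError / ValueError(neg shift) / KeyError / ValueError
def pvAnchorStep (pair_rows : List (Int × Int × Int × Int)) (nibble_order : Int × Int × Int × Int)
    (cands : List (List (Int × List Int))) (a : Int × Int) : Option (List (List (Int × List Int))) :=
  if 0 ≤ a.1 ∧ a.1 < (pair_rows.length : Int) then
    if (PySem.List.pyRange 0 4 1).all (fun p => decide (0 ≤ 12 - 4 * pvTup4 nibble_order p)) then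
      let nibs := (PySem.List.pyRange 0 4 1).map (fun p => pvNib nibble_order a.2 p)
      (PySem.List.pyRange 0 4 1).foldl (fun acc p =>
        match acc with
        | none => none
        | some st =>
          match pvAnchorPos pair_rows a nibs (st.getD p.toNat []) p with
          | none => none
          | some pos' => some (st.set p.toNat pos')) (some cands)
    else none
  else none

-- inner loop: for opid, ovs in cands[p].items(): ...
def pvDiscardInner (pos : List (Int × List Int)) (ch : Bool) (pid locked : Int) :
    Option (List (Int × List Int) × Bool) :=
  (pos.map (·.1)).foldl (fun acc opid =>
    acc.bind (fun s =>
      if opid ≠ pid then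
        let ovs := (pvAGet s.1 opid).getD []
        if locked ∈ ovs then
          let ovs' := ovs.erase locked           -- ovs.discard(locked) (sets hold distinct elements)
          if ovs'.isEmpty then none              -- ValueError: no valid nibble after propagation
          else some (pvASet s.1 opid ovs', true)
        else some s
      else some s)) (some (pos, ch))

-- for pid, vs in cands[p].items(): if len(vs) == 1: ...
def pvPassPos (pos0 : List (Int × List Int)) (ch0 : Bool) :
    Option (List (Int × List Int) × Bool) :=
  (pos0.map (·.1)).foldl (fun acc pid =>
    acc.bind (fun s =>
      let vs := (pvAGet s.1 pid).getD []
      if vs.length == 1 then pvDiscardInner s.1 s.2 pid (vs.headD 0)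
      else some s)) (some (pos0, ch0))

def pvPassAll (cands : List (List (Int × List Int))) :
    Option (List (List (Int × List Int)) × Bool) :=
  (PySem.List.pyRange 0 4 1).foldl (fun acc p =>
    acc.bind (fun s =>
      (pvPassPos (s.1.getD p.toNat []) s.2).bind (fun r =>
        some (s.1.set p.toNat r.1, r.2)))) (some (cands, false))

-- while changed: ... ; fuel 1025 can never run out: a pass that reports a change has removed
-- at least one of the at most 4*16*16 = 1024 candidate entries, so the loop exits within 1025 passes.
def pvPropLoop : Nat → List (List (Int × List Int)) → Option (List (List (Int × List Int)))
  | 0, st => some st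
  | f + 1, st =>
    match pvPassAll st with
    | none => none
    | some (st', ch) => if ch then pvPropLoop f st' else some st'

-- pos_freq[p][r[p]] += 1 over all rows (4 Counters)
def pvPosFreq (pair_rows : List (Int × Int × Int × Int)) : List (PySem.Dict Int Int) :=
  pair_rows.foldl (fun fs r =>
    (PySem.List.pyRange 0 4 1).foldl (fun fs p =>
      fs.set p.toNat ((fs.getD p.toNat PySem.Dict.empty).modify (pvTup4 r p) 0 (· + 1))) fs)
    ((PySem.List.pyRange 0 4 1).map (fun _ => PySem.Dict.empty))

-- the final per-position mapping (A's last loop body)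
def pvBuildA (rank : List Int) (freq : PySem.Dict Int Int) (pos : List (Int × List Int)) :
    List (Int × Int) :=
  let m0 := pos.filterMap (fun e => if e.2.length == 1 then some (e.1, e.2.headD 0) else none)
  let used : PySem.Set Int := PySem.Set.ofList (m0.map (·.2))
  let unresolved := PySem.List.sorted
      ((PySem.List.pyRange 0 16 1).filter (fun pid => !(m0.any (fun e => e.1 == pid))))
      (fun x => -(freq.getD x 0)) false
  let free_nibs := rank.filter (fun nb => !(used.contains nb))
  (unresolved.zip free_nibs).foldl (fun m e => pvMInsert m e.1 e.2) m0

def derive_mappings (pair_rows : List (Int × Int × Int × Int)) (anchors : List (Int × Int))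
    (nibble_order : Int × Int × Int × Int) (rank : List Int) : List (List (Int × Int)) :=
  -- none anywhere = a Python exception; Pre_ excludes those inputs, .getD [] is never taken there
  (((anchors.foldl (fun acc a =>
        match acc with
        | none => none
        | some st => pvAnchorStep pair_rows nibble_order st a) (some pvInitCands)).bind
      (fun st1 => pvPropLoop 1025 st1)).map
      (fun st2 =>
        let freqs := pvPosFreq pair_rows
        (PySem.List.pyRange 0 4 1).foldl (fun out p =>
          out ++ [pvBuildA rank (freqs.getD p.toNat PySem.Dict.empty) (st2.getD p.toNat [])]) [])).getD []

-- ===== PORT B =====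
-- pins[p].setdefault(pid, nib) with the contradictory-anchor check, for one position p
def pvPinPos (pair_rows : List (Int × Int × Int × Int)) (nibble_order : Int × Int × Int × Int)
    (a : Int × Int) (d : PySem.Dict Int Int) (p : Int) : Option (PySem.Dict Int Int) :=
  if 0 ≤ 12 - 4 * pvTup4 nibble_order p then     -- Python raises on a negative shift count
    let pid := pvTup4 (pvRow pair_rows a.1) p
    let nib := pvNib nibble_order a.2 p
    match d.get? pid with
    | some old => if old == nib then some d else none   -- contradictory anchors
    | none => some (d.insert pid nib)
  else none

-- one pass over anchors: pins[p] is the partial map pid -> pinned nibble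
def pvPins (pair_rows : List (Int × Int × Int × Int)) (nibble_order : Int × Int × Int × Int)
    (anchors : List (Int × Int)) : Option (List (PySem.Dict Int Int)) :=
  anchors.foldl (fun (acc : Option (List (PySem.Dict Int Int))) (a : Int × Int) =>
    match acc with
    | none => none
    | some pins =>
      if 0 ≤ a.1 ∧ a.1 < (pair_rows.length : Int) then
        (PySem.List.pyRange 0 4 1).foldl (fun (acc2 : Option (List (PySem.Dict Int Int))) (p : Int) =>
          match acc2 with
          | none => none
          | some pins =>
            match pvPinPos pair_rows nibble_order a (pins.getD p.toNat PySem.Dict.empty) p with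
            | none => none
            | some d' => some (pins.set p.toNat d')) (some pins)
      else none) (some ((PySem.List.pyRange 0 4 1).map (fun _ => PySem.Dict.empty)))

-- one position of B's output loop
def pvBuildB (pair_rows : List (Int × Int × Int × Int)) (rank : List Int) (p : Int)
    (pin0 : PySem.Dict Int Int) : Option (List (Int × Int)) :=
  let used0 : PySem.Set Int := PySem.Set.ofList pin0.values
  if used0.length ≠ pin0.size then none          -- two pairs pinned to one nibble → ValueError
  else
    let comp : Option (PySem.Dict Int Int × PySem.Set Int) :=
      if pin0.size == 15 then
        match (PySem.List.pyRange 0 16 1).find? (fun i => !(pin0.contains i)),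
              (PySem.List.pyRange 0 16 1).find? (fun v => !(used0.contains v)) with
        | some mp, some mv => some (pin0.insert mp mv, used0.add mv)
        | _, _ => none                           -- next() StopIteration (cannot happen)
      else some (pin0, used0)
    match comp with
    | none => none
    | some (pin, used) =>
      let freq := PySem.Dict.counter (pair_rows.map (fun r => pvTup4 r p))
      let m0 := (PySem.List.pyRange 0 16 1).filterMap (fun pid =>
          (pin.get? pid).map (fun v => (pid, v)))
      let unresolved := PySem.List.sorted
          ((PySem.List.pyRange 0 16 1).filter (fun pid => !(pin.contains pid)))
          (fun x => -(freq.getD x 0)) false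
      let free_nibs := rank.filter (fun nb => !(used.contains nb))
      some ((unresolved.zip free_nibs).foldl (fun m e => pvMInsert m e.1 e.2) m0)

def derive_mappings_alt (pair_rows : List (Int × Int × Int × Int)) (anchors : List (Int × Int))
    (nibble_order : Int × Int × Int × Int) (rank : List Int) : List (List (Int × Int)) :=
  -- none anywhere = a Python exception; Pre_ excludes those inputs, .getD [] is never taken there
  ((pvPins pair_rows nibble_order anchors).bind (fun pins =>
      (PySem.List.pyRange 0 4 1).foldl (fun acc p =>
        acc.bind (fun out =>
          (pvBuildB pair_rows rank p (pins.getD p.toNat PySem.Dict.empty)).map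
            (fun m => out ++ [m]))) (some []))).getD []

-- ===== PRECONDITION & SPEC =====
-- Pre_ holds exactly when Python A returns normally: every anchor index is in range, every
-- nibble_order component keeps the shift count nonnegative, every anchored pair-id lies in
-- 0..15 (a key of cands[p]), and no two anchors force one pair-id onto two nibbles or two
-- pair-ids onto one nibble at the same position.
def Pre_derive_mappings (pair_rows : List (Int × Int × Int × Int)) (anchors : List (Int × Int))
    (nibble_order : Int × Int × Int × Int) (rank : List Int) : Prop :=
  ∀ a ∈ anchors,
    (0 ≤ a.1 ∧ a.1 < (pair_rows.length : Int)) ∧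
    ∀ p ∈ ([0, 1, 2, 3] : List Int),
      pvTup4 nibble_order p ≤ 3 ∧
      (0 ≤ pvTup4 (pvRow pair_rows a.1) p ∧ pvTup4 (pvRow pair_rows a.1) p < 16) ∧
      ∀ b ∈ anchors,
        (pvTup4 (pvRow pair_rows a.1) p = pvTup4 (pvRow pair_rows b.1) p ↔
         pvNib nibble_order a.2 p = pvNib nibble_order b.2 p)

instance (pair_rows : List (Int × Int × Int × Int)) (anchors : List (Int × Int)) (nibble_order : Int × Int × Int × Int) (rank : List Int) : Decidable (Pre_derive_mappings pair_rows anchors nibble_order rank) := by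
  unfold Pre_derive_mappings; infer_instance

def pvWitness_derive_mappings : (List (Int × Int × Int × Int)) × (List (Int × Int)) × (Int × Int × Int × Int) × List Int :=
  ([(0, 1, 2, 3)], [(0, 291)], (0, 1, 2, 3), [0, 1, 2])

def Spec_derive_mappings (pair_rows : List (Int × Int × Int × Int)) (anchors : List (Int × Int)) (nibble_order : Int × Int × Int × Int) (rank : List Int) (out : List (List (Int × Int))) : Prop := out = derive_mappings_alt pair_rows anchors nibble_order rank
instance (pair_rows : List (Int × Int × Int × Int)) (anchors : List (Int × Int)) (nibble_order : Int × Int × Int × Int) (rank : List Int) (out : List (List (Int × Int))) : Decidable (Spec_derive_mappings pair_rows anchors nibble_order rank out) := by unfold Spec_derive_mappings; infer_instance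

-- ===== CLAIM (what is proved, stated in full; the proofs are below) =====
def Claim_equal_derive_mappings : Prop := ∀ (pair_rows : List (Int × Int × Int × Int)) (anchors : List (Int × Int)) (nibble_order : Int × Int × Int × Int) (rank : List Int), Dom_derive_mappings pair_rows anchors nibble_order rank → Pre_derive_mappings pair_rows anchors nibble_order rank → Spec_derive_mappings pair_rows anchors nibble_order rank (derive_mappings pair_rows anchors nibble_order rank)

-- ===== LEMMAS AND PROOFS =====

-- ---------- basic arithmetic / list facts ----------
theorem pv_band15 (a : Int) : 0 ≤ PySem.Int.band a 15 ∧ PySem.Int.band a 15 < 16 := by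
  by_cases h : 0 ≤ a
  · simp only [PySem.Int.band, if_pos h, if_pos (show ((0:Int) ≤ 15) from by norm_num)]
    have h15 : a.toNat &&& (15:Int).toNat ≤ 15 := Nat.and_le_right
    omega
  · simp only [PySem.Int.band, if_neg h, if_pos (show ((0:Int) ≤ 15) from by norm_num)]
    have h15 : (15:Int).toNat - ((15:Int).toNat &&& (-a-1).toNat) ≤ 15 :=
      le_trans (Nat.sub_le _ _) (by norm_num)
    omega

theorem pv_nib_range (no : Int × Int × Int × Int) (e p : Int) :
    0 ≤ pvNib no e p ∧ pvNib no e p < 16 := pv_band15 _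

theorem pv_mem_full16 (k : Int) : k ∈ pvFull16 ↔ 0 ≤ k ∧ k < 16 := by
  simp [pvFull16]; omega
theorem pv_full16_nodup : pvFull16.Nodup := by decide

theorem pv_aget_map (l : List Int) (g : Int → List Int) (k : Int) :
    pvAGet (l.map (fun k' => (k', g k'))) k = if k ∈ l then some (g k) else none := by
  induction l with
  | nil => simp [pvAGet]
  | cons a t ih =>
    by_cases h : a = k
    · subst h; simp [pvAGet, List.find?]
    · simp only [List.map_cons, pvAGet, List.find?_cons,
        show ((a, g a).1 == k) = false from by simp [h]] at *
      rw [ih]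
      by_cases hk : k ∈ t <;> simp [hk, h, Ne.symm h]

theorem pv_aset_map (l : List Int) (g : Int → List Int) (k : Int) (v : List Int) :
    pvASet (l.map (fun k' => (k', g k'))) k v
      = l.map (fun k' => (k', if k' = k then v else g k')) := by
  induction l with
  | nil => rfl
  | cons a t ih =>
    by_cases h : a = k
    · subst h; simpa [pvASet] using ih
    · simpa [pvASet, h] using ih

theorem pv_shape_keys (l : List Int) (g : Int → List Int) :
    (l.map (fun k' => (k', g k'))).map (·.1) = l := by
  induction l with
  | nil => rfl
  | cons a t ih => simpa using ih

theorem pv_shape_congr (l : List Int) (g g' : Int → List Int)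
    (h : ∀ k ∈ l, g k = g' k) :
    l.map (fun k' => (k', g k')) = l.map (fun k' => (k', g' k')) := by
  apply List.map_congr_left; intro k hk; rw [h k hk]

theorem pv_filter_not_mem_length (l V : List Int) (hl : l.Nodup) (hV : V.Nodup)
    (hsub : ∀ x ∈ V, x ∈ l) :
    (l.filter (fun x => !(V.contains x))).length + V.length = l.length := by
  induction V generalizing l with
  | nil => simp
  | cons v V ih =>
    have hv : v ∈ l := hsub v (by simp)
    have hVn : V.Nodup := (List.nodup_cons.mp hV).2
    have hvV : v ∉ V := (List.nodup_cons.mp hV).1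
    have step : l.filter (fun x => !((v :: V).contains x))
        = (l.filter (fun x => !(V.contains x))).filter (fun x => x ≠ v) := by
      rw [List.filter_filter]
      apply List.filter_congr; intro x hx
      by_cases h1 : x = v <;> by_cases h2 : x ∈ V <;>
        simp [h1, h2, List.contains_iff_mem] at * <;> tauto
    rw [step]
    have hvmem : v ∈ l.filter (fun x => !(V.contains x)) := by
      simp [List.mem_filter, hv, List.contains_iff_mem]; tauto
    have hnd : (l.filter (fun x => !(V.contains x))).Nodup := hl.filter _
    have herase : (l.filter (fun x => !(V.contains x))).filter (fun x => x ≠ v)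
        = (l.filter (fun x => !(V.contains x))).erase v := by
      rw [List.Nodup.erase_eq_filter hnd]
      apply List.filter_congr; intro x _; by_cases hxv : x = v <;> simp [hxv, bne]
    rw [herase, List.length_erase_of_mem hvmem]
    have ihh := ih l hl hVn (fun x hx => hsub x (by simp [hx]))
    have hpos : 0 < (l.filter (fun x => !(V.contains x))).length := List.length_pos_of_mem hvmem
    simp only [List.length_cons]
    omega

theorem pv_filter_eq_singleton (nib : Int) (h0 : 0 ≤ nib) (h1 : nib < 16) :
    pvFull16.filter (fun x => x == nib) = [nib] := by
  have hm : nib ∈ pvFull16 := (pv_mem_full16 nib).2 ⟨h0, h1⟩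
  rw [List.filter_beq, List.count_eq_one_of_mem pv_full16_nodup hm, List.replicate_one]

-- ---------- the abstraction: A's per-position dict of candidate sets, as a function of B's pins ----------
def pvEnt (d : PySem.Dict Int Int) (k : Int) : List Int :=
  match d.get? k with | some v => [v] | none => pvFull16

def pvEnt2 (d : PySem.Dict Int Int) (k : Int) : List Int :=
  match d.get? k with
  | some v => [v]
  | none => pvFull16.filter (fun x => !(d.values.contains x))

def pvShapeD (g : Int → List Int) : List (Int × List Int) :=
  pvFull16.map (fun k => (k, g k))

-- invariant carried through the anchor phase: pins keys are unique and every pin comes from an anchor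
def PvPosOK (pair_rows : List (Int × Int × Int × Int)) (anchors : List (Int × Int))
    (nibble_order : Int × Int × Int × Int) (p : Int) (d : PySem.Dict Int Int) : Prop :=
  d.keys.Nodup ∧
  ∀ kv ∈ d.items, ∃ b ∈ anchors,
    kv.1 = pvTup4 (pvRow pair_rows b.1) p ∧ kv.2 = pvNib nibble_order b.2 p

theorem pv_posok_facts {pair_rows anchors nibble_order rank p d}
    (hPre : Pre_derive_mappings pair_rows anchors nibble_order rank)
    (hp : p ∈ ([0, 1, 2, 3] : List Int))
    (hOK : PvPosOK pair_rows anchors nibble_order p d) :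
    (∀ kv ∈ d.items, (0 ≤ kv.1 ∧ kv.1 < 16) ∧ (0 ≤ kv.2 ∧ kv.2 < 16)) ∧
    (∀ kv ∈ d.items, ∀ kv' ∈ d.items, kv.2 = kv'.2 → kv.1 = kv'.1) := by
  constructor
  · intro kv hkv
    obtain ⟨b, hb, hk, hv⟩ := hOK.2 kv hkv
    refine ⟨?_, by rw [hv]; exact pv_nib_range _ _ _⟩
    have := ((hPre b hb).2 p hp).2.1
    rw [hk]; exact this
  · intro kv hkv kv' hkv' hvv
    obtain ⟨b, hb, hk, hv⟩ := hOK.2 kv hkv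
    obtain ⟨b', hb', hk', hv'⟩ := hOK.2 kv' hkv'
    have hiff := ((hPre b hb).2 p hp).2.2 b' hb'
    rw [hk, hk']
    exact hiff.mpr (by rw [← hv, ← hv', hvv])

-- ---------- anchor phase ----------
theorem pv_nibs_getD {nibble_order : Int × Int × Int × Int} {e : Int} (p : Int)
    (hp : p ∈ ([0, 1, 2, 3] : List Int)) :
    (([0, 1, 2, 3] : List Int).map (fun q => pvNib nibble_order e q)).getD p.toNat 0
      = pvNib nibble_order e p := by
  fin_cases hp <;> rfl

theorem pv_anchor_pos {pair_rows anchors nibble_order rank} {a : Int × Int} {p : Int}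
    {d : PySem.Dict Int Int}
    (hPre : Pre_derive_mappings pair_rows anchors nibble_order rank)
    (ha : a ∈ anchors) (hp : p ∈ ([0, 1, 2, 3] : List Int))
    (hOK : PvPosOK pair_rows anchors nibble_order p d) :
    ∃ d', pvPinPos pair_rows nibble_order a d p = some d' ∧
      pvAnchorPos pair_rows a (([0, 1, 2, 3] : List Int).map (fun q => pvNib nibble_order a.2 q))
        (pvShapeD (pvEnt d)) p = some (pvShapeD (pvEnt d')) ∧
      PvPosOK pair_rows anchors nibble_order p d' := by
  have hshift : (0:Int) ≤ 12 - 4 * pvTup4 nibble_order p := by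
    have := ((hPre a ha).2 p hp).1; omega
  have hpidr := ((hPre a ha).2 p hp).2.1
  set pid := pvTup4 (pvRow pair_rows a.1) p with hpid
  set nib := pvNib nibble_order a.2 p with hnib
  have hnibr := pv_nib_range nibble_order a.2 p
  have hget : pvAGet (pvShapeD (pvEnt d)) pid = some (pvEnt d pid) := by
    rw [pvShapeD, pv_aget_map, if_pos ((pv_mem_full16 pid).2 hpidr)]
  cases hdg : d.get? pid with
  | some old =>
    have hmem := PySem.Dict.mem_items_of_get?_eq_some d hdg
    obtain ⟨b, hb, hk, hv⟩ := hOK.2 (pid, old) hmem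
    have hiff := ((hPre a ha).2 p hp).2.2 b hb
    have hold : old = nib := by
      have h2 := hiff.mp hk
      simp only at hv
      rw [hv, hnib, h2]
    refine ⟨d, ?_, ?_, hOK⟩
    · rw [pvPinPos, if_pos hshift]
      simp only [← hpid, ← hnib, hdg, hold, beq_self_eq_true, if_true]
    · rw [pvAnchorPos]
      simp only [← hpid, hget, pv_nibs_getD p hp, ← hnib]
      have hent : pvEnt d pid = [old] := by rw [pvEnt, hdg]
      rw [hent, hold]
      simp only [List.filter_cons, List.filter_nil, beq_self_eq_true, if_true]
      rw [if_neg (by simp)]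
      rw [pvShapeD, pv_aset_map]
      congr 1
      apply (pv_shape_congr _ _ _ ?_).symm
      intro k hk16
      by_cases hkp : k = pid
      · subst hkp; rw [if_pos rfl, hent, hold]
      · rw [if_neg hkp]
  | none =>
    refine ⟨d.insert pid nib, ?_, ?_, ?_⟩
    · rw [pvPinPos, if_pos hshift]
      simp only [← hpid, ← hnib, hdg]
    · rw [pvAnchorPos]
      simp only [← hpid, hget, pv_nibs_getD p hp, ← hnib]
      have hent : pvEnt d pid = pvFull16 := by rw [pvEnt, hdg]
      rw [hent, pv_filter_eq_singleton nib hnibr.1 hnibr.2]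
      rw [if_neg (by simp)]
      rw [pvShapeD, pv_aset_map]
      congr 1
      apply pv_shape_congr
      intro k hk16
      by_cases hkp : k = pid
      · subst hkp
        rw [if_pos rfl, pvEnt, PySem.Dict.get?_insert_self]
      · rw [if_neg hkp, pvEnt, pvEnt, PySem.Dict.get?_insert_of_ne d nib hkp]
    · constructor
      · exact PySem.Dict.nodup_keys_insert _ _ _ hOK.1
      · intro kv hkv
        rw [PySem.Dict.items_insert_of_not_contains d nib
          ((PySem.Dict.get?_eq_none_iff_contains d pid).mp hdg)] at hkv
        rcases List.mem_append.mp hkv with h | h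
        · exact hOK.2 kv h
        · simp at h; subst h
          exact ⟨a, ha, rfl, rfl⟩

theorem pv_anchor_step {pair_rows : List (Int × Int × Int × Int)} {anchors : List (Int × Int)}
    {nibble_order : Int × Int × Int × Int} {rank : List Int} {a : Int × Int}
    {d0 d1 d2 d3 : PySem.Dict Int Int}
    (hPre : Pre_derive_mappings pair_rows anchors nibble_order rank)
    (ha : a ∈ anchors)
    (h0 : PvPosOK pair_rows anchors nibble_order 0 d0)
    (h1 : PvPosOK pair_rows anchors nibble_order 1 d1)
    (h2 : PvPosOK pair_rows anchors nibble_order 2 d2)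
    (h3 : PvPosOK pair_rows anchors nibble_order 3 d3) :
    ∃ d0' d1' d2' d3',
      pvAnchorStep pair_rows nibble_order
        [pvShapeD (pvEnt d0), pvShapeD (pvEnt d1), pvShapeD (pvEnt d2), pvShapeD (pvEnt d3)] a
        = some [pvShapeD (pvEnt d0'), pvShapeD (pvEnt d1'), pvShapeD (pvEnt d2'), pvShapeD (pvEnt d3')] ∧
      (PySem.List.pyRange 0 4 1).foldl (fun (acc2 : Option (List (PySem.Dict Int Int))) (p : Int) =>
        match acc2 with
        | none => none
        | some pins =>
          match pvPinPos pair_rows nibble_order a (pins.getD p.toNat PySem.Dict.empty) p with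
          | none => none
          | some d' => some (pins.set p.toNat d')) (some [d0, d1, d2, d3])
        = some [d0', d1', d2', d3'] ∧
      PvPosOK pair_rows anchors nibble_order 0 d0' ∧
      PvPosOK pair_rows anchors nibble_order 1 d1' ∧
      PvPosOK pair_rows anchors nibble_order 2 d2' ∧
      PvPosOK pair_rows anchors nibble_order 3 d3' := by
  obtain ⟨d0', hB0, hA0, hOK0⟩ := pv_anchor_pos (p := 0) hPre ha (by simp) h0
  obtain ⟨d1', hB1, hA1, hOK1⟩ := pv_anchor_pos (p := 1) hPre ha (by simp) h1
  obtain ⟨d2', hB2, hA2, hOK2⟩ := pv_anchor_pos (p := 2) hPre ha (by simp) h2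
  obtain ⟨d3', hB3, hA3, hOK3⟩ := pv_anchor_pos (p := 3) hPre ha (by simp) h3
  refine ⟨d0', d1', d2', d3', ?_, ?_, hOK0, hOK1, hOK2, hOK3⟩
  · rw [pvAnchorStep, if_pos (hPre a ha).1, if_pos ?hall]
    case hall =>
      rw [show PySem.List.pyRange 0 4 1 = [0, 1, 2, 3] from by decide]
      have hs : ∀ p ∈ ([0, 1, 2, 3] : List Int), (0:Int) ≤ 12 - 4 * pvTup4 nibble_order p :=
        fun p hp => by have := ((hPre a ha).2 p hp).1; omega
      simp only [List.all_cons, List.all_nil, Bool.and_eq_true, decide_eq_true_eq, and_true]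
      exact ⟨hs 0 (by simp), hs 1 (by simp), hs 2 (by simp), hs 3 (by simp)⟩
    rw [show PySem.List.pyRange 0 4 1 = [0, 1, 2, 3] from by decide]
    simp only [List.foldl_cons, List.foldl_nil, List.getD, List.getElem?_cons_zero,
      List.getElem?_cons_succ, Int.toNat_zero, Int.toNat_one,
      show ((2:Int).toNat) = 2 from rfl, show ((3:Int).toNat) = 3 from rfl, List.set,
      Option.getD_some]
    rw [hA0]
    simp only [List.getD, List.getElem?_cons_zero, List.getElem?_cons_succ, Option.getD_some, List.set]
    rw [hA1]
    simp only [List.getD, List.getElem?_cons_zero, List.getElem?_cons_succ, Option.getD_some, List.set]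
    rw [hA2]
    simp only [List.getD, List.getElem?_cons_zero, List.getElem?_cons_succ, Option.getD_some, List.set]
    rw [hA3]
  · rw [show PySem.List.pyRange 0 4 1 = [0, 1, 2, 3] from by decide]
    simp only [List.foldl_cons, List.foldl_nil, List.getD, List.getElem?_cons_zero,
      List.getElem?_cons_succ, Int.toNat_zero, Int.toNat_one,
      show ((2:Int).toNat) = 2 from rfl, show ((3:Int).toNat) = 3 from rfl, List.set,
      Option.getD_some]
    rw [hB0]
    simp only [List.getD, List.getElem?_cons_zero, List.getElem?_cons_succ, Option.getD_some, List.set]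
    rw [hB1]
    simp only [List.getD, List.getElem?_cons_zero, List.getElem?_cons_succ, Option.getD_some, List.set]
    rw [hB2]
    simp only [List.getD, List.getElem?_cons_zero, List.getElem?_cons_succ, Option.getD_some, List.set]
    rw [hB3]

theorem pv_phase {pair_rows : List (Int × Int × Int × Int)} {anchors : List (Int × Int)}
    {nibble_order : Int × Int × Int × Int} {rank : List Int}
    (hPre : Pre_derive_mappings pair_rows anchors nibble_order rank)
    (l : List (Int × Int)) (hl : ∀ x ∈ l, x ∈ anchors)
    (d0 d1 d2 d3 : PySem.Dict Int Int)
    (h0 : PvPosOK pair_rows anchors nibble_order 0 d0)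
    (h1 : PvPosOK pair_rows anchors nibble_order 1 d1)
    (h2 : PvPosOK pair_rows anchors nibble_order 2 d2)
    (h3 : PvPosOK pair_rows anchors nibble_order 3 d3) :
    ∃ d0' d1' d2' d3',
      l.foldl (fun acc a =>
          match acc with
          | none => none
          | some st => pvAnchorStep pair_rows nibble_order st a)
        (some [pvShapeD (pvEnt d0), pvShapeD (pvEnt d1), pvShapeD (pvEnt d2), pvShapeD (pvEnt d3)])
        = some [pvShapeD (pvEnt d0'), pvShapeD (pvEnt d1'), pvShapeD (pvEnt d2'), pvShapeD (pvEnt d3')] ∧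
      l.foldl (fun (acc : Option (List (PySem.Dict Int Int))) (a : Int × Int) =>
          match acc with
          | none => none
          | some pins =>
            if 0 ≤ a.1 ∧ a.1 < (pair_rows.length : Int) then
              (PySem.List.pyRange 0 4 1).foldl (fun (acc2 : Option (List (PySem.Dict Int Int))) (p : Int) =>
                match acc2 with
                | none => none
                | some pins =>
                  match pvPinPos pair_rows nibble_order a (pins.getD p.toNat PySem.Dict.empty) p with
                  | none => none
                  | some d' => some (pins.set p.toNat d')) (some pins)
            else none) (some [d0, d1, d2, d3]) = some [d0', d1', d2', d3'] ∧
      PvPosOK pair_rows anchors nibble_order 0 d0' ∧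
      PvPosOK pair_rows anchors nibble_order 1 d1' ∧
      PvPosOK pair_rows anchors nibble_order 2 d2' ∧
      PvPosOK pair_rows anchors nibble_order 3 d3' := by
  induction l generalizing d0 d1 d2 d3 with
  | nil => exact ⟨d0, d1, d2, d3, rfl, rfl, h0, h1, h2, h3⟩
  | cons a t ih =>
    obtain ⟨e0, e1, e2, e3, hA, hB, k0, k1, k2, k3⟩ :=
      pv_anchor_step hPre (hl a (by simp)) h0 h1 h2 h3
    obtain ⟨f0, f1, f2, f3, hA2, hB2, m0, m1, m2, m3⟩ :=
      ih (fun x hx => hl x (by simp [hx])) e0 e1 e2 e3 k0 k1 k2 k3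
    refine ⟨f0, f1, f2, f3, ?_, ?_, m0, m1, m2, m3⟩
    · rw [List.foldl_cons,
        show (match (some [pvShapeD (pvEnt d0), pvShapeD (pvEnt d1), pvShapeD (pvEnt d2), pvShapeD (pvEnt d3)] : Option (List (List (Int × List Int)))) with
          | none => none
          | some st => pvAnchorStep pair_rows nibble_order st a)
          = some [pvShapeD (pvEnt e0), pvShapeD (pvEnt e1), pvShapeD (pvEnt e2), pvShapeD (pvEnt e3)] from hA]
      exact hA2
    · rw [List.foldl_cons,
        show (match (some [d0, d1, d2, d3] : Option (List (PySem.Dict Int Int))) with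
          | none => none
          | some pins =>
            if 0 ≤ a.1 ∧ a.1 < (pair_rows.length : Int) then
              (PySem.List.pyRange 0 4 1).foldl (fun (acc2 : Option (List (PySem.Dict Int Int))) (p : Int) =>
                match acc2 with
                | none => none
                | some pins =>
                  match pvPinPos pair_rows nibble_order a (pins.getD p.toNat PySem.Dict.empty) p with
                  | none => none
                  | some d' => some (pins.set p.toNat d')) (some pins)
            else none) = some [e0, e1, e2, e3] from by
              simp only [show (0 ≤ a.1 ∧ a.1 < (pair_rows.length : Int)) ↔ True from
                iff_true_intro (hPre a (hl a (by simp))).1, if_true]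
              exact hB]
      exact hB2

-- ---------- propagation phase ----------
def pvVals (d : PySem.Dict Int Int) (done : List Int) : List Int := done.filterMap d.get?

def pvEntP (d : PySem.Dict Int Int) (done : List Int) (k : Int) : List Int :=
  match d.get? k with
  | some v => [v]
  | none => pvFull16.filter (fun x => !((pvVals d done).contains x))

-- the facts about the pins dictionary that propagation needs
def PvDOK (d : PySem.Dict Int Int) : Prop :=
  d.keys.Nodup ∧
  (∀ kv ∈ d.items, (0 ≤ kv.1 ∧ kv.1 < 16) ∧ (0 ≤ kv.2 ∧ kv.2 < 16)) ∧
  (∀ kv ∈ d.items, ∀ kv' ∈ d.items, kv.2 = kv'.2 → kv.1 = kv'.1)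

theorem pv_posok_dok {pair_rows anchors nibble_order rank p d}
    (hPre : Pre_derive_mappings pair_rows anchors nibble_order rank)
    (hp : p ∈ ([0, 1, 2, 3] : List Int))
    (hOK : PvPosOK pair_rows anchors nibble_order p d) : PvDOK d := by
  obtain ⟨hr, hi⟩ := pv_posok_facts hPre hp hOK
  exact ⟨hOK.1, hr, hi⟩

theorem pv_get_range {d : PySem.Dict Int Int} (hd : PvDOK d) {k v : Int}
    (h : d.get? k = some v) : (0 ≤ k ∧ k < 16) ∧ (0 ≤ v ∧ v < 16) :=
  hd.2.1 (k, v) (PySem.Dict.mem_items_of_get?_eq_some d h)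

theorem pv_get_inj {d : PySem.Dict Int Int} (hd : PvDOK d) {k k' v : Int}
    (h : d.get? k = some v) (h' : d.get? k' = some v) : k = k' :=
  hd.2.2 (k, v) (PySem.Dict.mem_items_of_get?_eq_some d h)
    (k', v) (PySem.Dict.mem_items_of_get?_eq_some d h') rfl

theorem pv_mem_values {d : PySem.Dict Int Int} (hd : PvDOK d) (x : Int) :
    x ∈ d.values ↔ ∃ k, d.get? k = some x := by
  constructor
  · intro hx
    rcases List.mem_map.mp hx with ⟨kv, hkv, hv⟩
    refine ⟨kv.1, ?_⟩
    rw [show kv = (kv.1, x) from by rw [← hv]] at hkv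
    exact PySem.Dict.get?_of_mem_items d hkv hd.1
  · rintro ⟨k, hk⟩
    exact List.mem_map.mpr ⟨(k, x), PySem.Dict.mem_items_of_get?_eq_some d hk, rfl⟩

theorem pv_values_nodup {d : PySem.Dict Int Int} (hd : PvDOK d) : d.values.Nodup := by
  have hitems : d.items.Nodup := List.Nodup.of_map _ hd.1
  exact List.Nodup.map_on (fun x hx y hy hxy => by
    have h1 := hd.2.2 x hx y hy hxy
    exact Prod.ext h1 hxy) hitems

theorem pv_values_len {d : PySem.Dict Int Int} : d.values.length = d.keys.length := by
  simp [PySem.Dict.values, PySem.Dict.keys]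

theorem pv_nodup_sub16_len (l : List Int) (hl : l.Nodup) (hsub : ∀ x ∈ l, x ∈ pvFull16) :
    l.length ≤ 16 := by
  have := (List.Nodup.subperm hl (fun x hx => hsub x hx)).length_le
  simpa [pvFull16] using this

theorem pv_keys_mem_iff {d : PySem.Dict Int Int} (k : Int) :
    k ∈ d.keys ↔ ∃ v, d.get? k = some v := by
  rw [← Option.isSome_iff_exists]
  constructor
  · intro hk
    cases hg : d.get? k
    · exact absurd hk ((PySem.Dict.get?_eq_none_iff_not_mem_keys d k).mp hg)
    · simp [hg]
  · intro hs
    by_contra hk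
    rw [(PySem.Dict.get?_eq_none_iff_not_mem_keys d k).mpr hk] at hs
    simp at hs

theorem pv_keys_sub16 {d : PySem.Dict Int Int} (hd : PvDOK d) :
    ∀ k ∈ d.keys, k ∈ pvFull16 := by
  intro k hk
  rcases (pv_keys_mem_iff k).mp hk with ⟨v, hv⟩
  exact (pv_mem_full16 k).2 (pv_get_range hd hv).1

theorem pv_size_le15 {d : PySem.Dict Int Int} (hd : PvDOK d) {o : Int}
    (ho16 : o ∈ pvFull16) (ho : d.get? o = none) : d.keys.length ≤ 15 := by
  have hko : o ∉ d.keys := by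
    intro hk
    rcases (pv_keys_mem_iff o).mp hk with ⟨v, hv⟩
    rw [ho] at hv; cases hv
  have hnd : (o :: d.keys).Nodup := List.nodup_cons.mpr ⟨hko, hd.1⟩
  have := pv_nodup_sub16_len (o :: d.keys) hnd (by
    intro x hx
    rcases List.mem_cons.mp hx with h | h
    · subst h; exact ho16
    · exact pv_keys_sub16 hd x h)
  simp at this
  omega

theorem pv_unique_unpinned {d : PySem.Dict Int Int} (hd : PvDOK d)
    (hsize : d.keys.length = 15) {o pid : Int}
    (ho16 : o ∈ pvFull16) (hp16 : pid ∈ pvFull16)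
    (ho : d.get? o = none) (hp : d.get? pid = none) : o = pid := by
  by_contra hne
  have hko : o ∉ d.keys := by
    intro hk; rcases (pv_keys_mem_iff o).mp hk with ⟨v, hv⟩; rw [ho] at hv; cases hv
  have hkp : pid ∉ d.keys := by
    intro hk; rcases (pv_keys_mem_iff pid).mp hk with ⟨v, hv⟩; rw [hp] at hv; cases hv
  have hnd : (o :: pid :: d.keys).Nodup := by
    refine List.nodup_cons.mpr ⟨?_, List.nodup_cons.mpr ⟨hkp, hd.1⟩⟩
    simp [hne, hko]
  have := pv_nodup_sub16_len (o :: pid :: d.keys) hnd (by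
    intro x hx
    rcases List.mem_cons.mp hx with h | hx'
    · subst h; exact ho16
    rcases List.mem_cons.mp hx' with h | h
    · subst h; exact hp16
    · exact pv_keys_sub16 hd x h)
  simp at this
  omega

theorem pv_vals_mem {d : PySem.Dict Int Int} {done : List Int} (x : Int) :
    x ∈ pvVals d done ↔ ∃ k ∈ done, d.get? k = some x := List.mem_filterMap

theorem pv_vals_nodup {d : PySem.Dict Int Int} (hd : PvDOK d) {done : List Int}
    (hdone : done.Nodup) : (pvVals d done).Nodup := by
  induction done with
  | nil => simp [pvVals]
  | cons k t ih =>
    have hkt : k ∉ t := (List.nodup_cons.mp hdone).1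
    have ht := ih (List.nodup_cons.mp hdone).2
    rw [pvVals, List.filterMap_cons]
    cases hg : d.get? k with
    | none => exact ht
    | some v =>
      refine List.nodup_cons.mpr ⟨?_, ht⟩
      intro hv
      rcases (pv_vals_mem v).mp hv with ⟨k', hk', hg'⟩
      exact hkt (pv_get_inj hd hg hg' ▸ hk')

theorem pv_vals_sub_values {d : PySem.Dict Int Int} (hd : PvDOK d) {done : List Int} :
    ∀ x ∈ pvVals d done, x ∈ d.values := by
  intro x hx
  rcases (pv_vals_mem x).mp hx with ⟨k, _, hg⟩
  exact (pv_mem_values hd x).mpr ⟨k, hg⟩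

theorem pv_vals_sub16 {d : PySem.Dict Int Int} (hd : PvDOK d) {done : List Int} :
    ∀ x ∈ pvVals d done, x ∈ pvFull16 := by
  intro x hx
  rcases (pv_vals_mem x).mp hx with ⟨k, _, hg⟩
  exact (pv_mem_full16 x).2 (pv_get_range hd hg).2

theorem pv_vals_not_mem {d : PySem.Dict Int Int} (hd : PvDOK d) {done : List Int}
    {pid v : Int} (hpid : pid ∉ done) (hv : d.get? pid = some v) : v ∉ pvVals d done := by
  intro hmem
  rcases (pv_vals_mem v).mp hmem with ⟨k, hk, hg⟩
  exact hpid (pv_get_inj hd hv hg ▸ hk)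

-- when |pvVals d done| = 15 and some pid is unpinned, valsdone exhausts d.values
theorem pv_vals_exhaust {d : PySem.Dict Int Int} (hd : PvDOK d) {done : List Int}
    (hdone : done.Nodup) {pid : Int} (hp16 : pid ∈ pvFull16) (hp : d.get? pid = none)
    (hlen : (pvVals d done).length = 15) : ∀ x ∈ d.values, x ∈ pvVals d done := by
  have hsub : pvVals d done ⊆ d.values := fun x hx => pv_vals_sub_values hd x hx
  have hsp := List.Nodup.subperm (pv_vals_nodup hd hdone) hsub
  have hvl : d.values.length ≤ 15 := by
    rw [pv_values_len]; exact pv_size_le15 hd hp16 hp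
  have hperm := hsp.perm_of_length_le (by omega)
  intro x hx
  exact hperm.mem_iff.mpr hx

-- the inner discard loop on a full-shape state
theorem pv_inner_go (pid locked : Int) (ks : List Int) (hks : ks.Nodup)
    (hsub : ∀ o ∈ ks, o ∈ pvFull16) (h : Int → List Int) (ch : Bool)
    (hne : ∀ o ∈ ks, o ≠ pid → locked ∈ h o → ¬(h o).erase locked = []) :
    ∃ h', (ks.foldl (fun acc opid =>
        acc.bind (fun (s : List (Int × List Int) × Bool) =>
          if opid ≠ pid then
            let ovs := (pvAGet s.1 opid).getD []
            if locked ∈ ovs then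
              let ovs' := ovs.erase locked
              if ovs'.isEmpty then none
              else some (pvASet s.1 opid ovs', true)
            else some s
          else some s)) (some (pvShapeD h, ch)))
      = some (pvShapeD h',
          ch || ks.any (fun o => decide (o ≠ pid) && decide (locked ∈ h o)))
      ∧ ∀ k, h' k = if k ∈ ks ∧ k ≠ pid ∧ locked ∈ h k then (h k).erase locked else h k := by
  induction ks generalizing h ch with
  | nil => exact ⟨h, by simp, by simp⟩
  | cons o t ih =>
    have ho16 := hsub o (by simp)
    have hot : o ∉ t := (List.nodup_cons.mp hks).1
    have hts : t.Nodup := (List.nodup_cons.mp hks).2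
    have hget : pvAGet (pvShapeD h) o = some (h o) := by
      rw [pvShapeD, pv_aget_map, if_pos ho16]
    rw [List.foldl_cons, Option.bind_some]
    by_cases hop : o = pid
    · rw [if_neg (by simp [hop])]
      obtain ⟨h', hfold, hspec⟩ := ih hts (fun x hx => hsub x (by simp [hx])) h ch
        (fun x hx => hne x (by simp [hx]))
      refine ⟨h', ?_, ?_⟩
      · rw [hfold]
        have hflag : (ch || t.any (fun o' => decide (o' ≠ pid) && decide (locked ∈ h o')))
            = (ch || (o :: t).any (fun o' => decide (o' ≠ pid) && decide (locked ∈ h o'))) := by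
          simp [hop]
        rw [hflag]
      · intro k
        rw [hspec k]
        by_cases hk : k ∈ t <;> by_cases hkp : k = pid <;> simp [hk, hkp, hop] <;> intro hko <;> simp [hko, hop] at *
    · rw [if_pos hop]
      simp only [hget, Option.getD_some]
      by_cases hlm : locked ∈ h o
      · rw [if_pos hlm]
        have hemp : ((h o).erase locked).isEmpty = false := by
          rw [List.isEmpty_eq_false_iff]  -- name?
          exact hne o (by simp) hop hlm
        rw [hemp]
        simp only [Bool.false_eq_true, if_false]
        rw [pvShapeD, pv_aset_map]
        set h1 : Int → List Int := fun k => if k = o then (h o).erase locked else h k with hh1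
        have hshape : (pvFull16.map (fun k' => (k', if k' = o then (h o).erase locked else h k')))
            = pvShapeD h1 := rfl
        rw [hshape]
        obtain ⟨h', hfold, hspec⟩ := ih hts (fun x hx => hsub x (by simp [hx])) h1 true
          (fun x hx hxp hxl => by
            have hxo : x ≠ o := fun he => hot (he ▸ hx)
            rw [hh1] at *
            simp only [if_neg hxo] at *
            exact hne x (by simp [hx]) hxp hxl)
        refine ⟨h', ?_, ?_⟩
        · rw [hfold]
          have hany : (t.any (fun o' => decide (o' ≠ pid) && decide (locked ∈ h1 o')))
              = (t.any (fun o' => decide (o' ≠ pid) && decide (locked ∈ h o'))) := by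
            rw [List.any_eq, List.any_eq]
            apply decide_eq_decide.mpr
            constructor <;> rintro ⟨x, hx, hp⟩ <;> refine ⟨x, hx, ?_⟩ <;>
              have hxo : x ≠ o := fun he => hot (he ▸ hx) <;>
              simpa [hh1, hxo] using hp
          have hflag : (true || t.any (fun o' => decide (o' ≠ pid) && decide (locked ∈ h1 o')))
              = (ch || (o :: t).any (fun o' => decide (o' ≠ pid) && decide (locked ∈ h o'))) := by
            rw [hany]; simp [hop, hlm]
          rw [hflag]
        · intro k
          rw [hspec k]
          by_cases hko : k = o
          · subst hko
            simp [hh1, hot, hop, hlm]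
          · simp only [hh1, if_neg hko]
            by_cases hk : k ∈ t <;> simp [hk, hko]
      · rw [if_neg hlm]
        obtain ⟨h', hfold, hspec⟩ := ih hts (fun x hx => hsub x (by simp [hx])) h ch
          (fun x hx => hne x (by simp [hx]))
        refine ⟨h', ?_, ?_⟩
        · rw [hfold]
          have hflag : (ch || t.any (fun o' => decide (o' ≠ pid) && decide (locked ∈ h o')))
              = (ch || (o :: t).any (fun o' => decide (o' ≠ pid) && decide (locked ∈ h o'))) := by
            simp [hlm]
          rw [hflag]
        · intro k
          rw [hspec k]
          by_cases hk : k ∈ t <;> by_cases hko : k = o <;> simp [hk, hko, hlm] <;> try (intro; simp_all)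

theorem pv_shapeD_keys (g : Int → List Int) : (pvShapeD g).map (·.1) = pvFull16 :=
  pv_shape_keys pvFull16 g

theorem pv_shapeD_congr (g g' : Int → List Int) (h : ∀ k ∈ pvFull16, g k = g' k) :
    pvShapeD g = pvShapeD g' := pv_shape_congr pvFull16 g g' h

theorem pv_filter_erase (V : List Int) (v : Int) :
    (pvFull16.filter (fun x => !(V.contains x))).erase v
      = pvFull16.filter (fun x => !((V ++ [v]).contains x)) := by
  have hnd := List.Nodup.filter (fun x => !(V.contains x)) pv_full16_nodup
  rw [List.Nodup.erase_eq_filter hnd, List.filter_filter]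
  apply List.filter_congr
  intro x hx
  by_cases h1 : x = v <;> by_cases h2 : x ∈ V <;> simp [h1, h2]

theorem pv_singleton_of_erase_nil (l : List Int) (v : Int) (hv : v ∈ l)
    (he : l.erase v = []) : l = [v] := by
  have h1 := List.length_erase_of_mem hv
  rw [he] at h1
  have h2 : 0 < l.length := List.length_pos_of_mem hv
  have h1' : (0:Nat) = l.length - 1 := by simpa using h1
  have h3 : l.length = 1 := by omega
  rcases List.length_eq_one_iff.mp h3 with ⟨a, ha⟩
  subst ha
  simp at hv
  rw [hv]

theorem pv_entP_len {d : PySem.Dict Int Int} (hd : PvDOK d) {done : List Int}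
    (hdone : done.Nodup) {q : Int} (hq : d.get? q = none) :
    (pvEntP d done q).length + (pvVals d done).length = 16 := by
  rw [pvEntP, hq]
  have := pv_filter_not_mem_length pvFull16 (pvVals d done) pv_full16_nodup
    (pv_vals_nodup hd hdone) (pv_vals_sub16 hd)
  simpa [pvFull16] using this

-- |pvVals d done| = 15 with an unpinned q in range forces |keys| = 15
theorem pv_L15_size {d : PySem.Dict Int Int} (hd : PvDOK d) {done : List Int}
    (hdone : done.Nodup) {q : Int} (hq16 : q ∈ pvFull16) (hq : d.get? q = none)
    (hL : (pvVals d done).length = 15) : d.keys.length = 15 := by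
  have hsub : pvVals d done ⊆ d.values := fun x hx => pv_vals_sub_values hd x hx
  have h1 := (List.Nodup.subperm (pv_vals_nodup hd hdone) hsub).length_le
  have h2 : d.values.length = d.keys.length := pv_values_len
  have h3 := pv_size_le15 hd hq16 hq
  omega

-- one full pass from the post-anchor state reaches the propagated state
theorem pv_pass1_go {d : PySem.Dict Int Int} (hd : PvDOK d) (done rest : List Int)
    (hsplit : pvFull16 = done ++ rest) (ch : Bool) :
    ∃ ch', (rest.foldl (fun acc q =>
        acc.bind (fun (s : List (Int × List Int) × Bool) =>
          let vs := (pvAGet s.1 q).getD []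
          if vs.length == 1 then pvDiscardInner s.1 s.2 q (vs.headD 0)
          else some s)) (some (pvShapeD (pvEntP d done), ch)))
      = some (pvShapeD (pvEntP d pvFull16), ch') := by
  induction rest generalizing done ch with
  | nil =>
    refine ⟨ch, ?_⟩
    rw [List.foldl_nil]
    rw [show done = pvFull16 from by simpa using hsplit.symm]
  | cons q rest' ih =>
    have hndfull : (done ++ q :: rest').Nodup := hsplit ▸ pv_full16_nodup
    have hq16 : q ∈ pvFull16 := by rw [hsplit]; simp
    have hdisj := (List.nodup_append.mp hndfull).2.2
    have hqdone : q ∉ done := fun hmem => hdisj q hmem q (by simp) rfl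
    have hdone : done.Nodup := (List.nodup_append.mp hndfull).1
    have hsplit' : pvFull16 = (done ++ [q]) ++ rest' := by rw [hsplit]; simp
    have hget : pvAGet (pvShapeD (pvEntP d done)) q = some (pvEntP d done q) := by
      rw [pvShapeD, pv_aget_map, if_pos hq16]
    rw [List.foldl_cons, Option.bind_some]
    simp only [hget, Option.getD_some]
    cases hgq : d.get? q with
    | some v =>
      have hvq := pv_get_range hd hgq
      have hv16 : v ∈ pvFull16 := (pv_mem_full16 v).2 hvq.2
      have hent : pvEntP d done q = [v] := by rw [pvEntP, hgq]
      rw [hent]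
      simp only [List.length_cons, List.length_nil, List.headD_cons]
      rw [show ((1 == 1) = true) from rfl]
      simp only [if_true]
      rw [pvDiscardInner, pv_shapeD_keys]
      -- v is not in any other pinned entry, and removing it from an unpinned entry cannot empty it
      have hne : ∀ o ∈ pvFull16, o ≠ q → v ∈ pvEntP d done o → ¬(pvEntP d done o).erase v = [] := by
        intro o ho16 hoq hvin herase
        cases hgo : d.get? o with
        | some w =>
          rw [pvEntP, hgo] at hvin
          simp at hvin
          exact hoq (pv_get_inj hd hgo (hvin ▸ hgq))
        | none =>
          rw [pvEntP, hgo] at hvin herase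
          have hsing := pv_singleton_of_erase_nil _ v hvin herase
          have hlen : (pvVals d done).length = 15 := by
            have := pv_entP_len hd hdone hgo
            rw [pvEntP, hgo, hsing] at this
            simp only [List.length_cons, List.length_nil] at this
            omega
          have hW : (pvVals d done ++ [v]).Nodup := by
            simp only [List.nodup_append]
            refine ⟨pv_vals_nodup hd hdone, List.nodup_singleton v, ?_⟩
            intro x hx b hb
            have hbv : b = v := by simpa using hb
            subst hbv
            intro hxv
            exact pv_vals_not_mem hd hqdone hgq (hxv ▸ hx)
          have hWsub : pvVals d done ++ [v] ⊆ d.values := by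
            intro x hx
            rcases List.mem_append.mp hx with h | h
            · exact pv_vals_sub_values hd x h
            · simp at h; subst h; exact (pv_mem_values hd _).mpr ⟨q, hgq⟩
          have := (List.Nodup.subperm hW hWsub).length_le
          have hvl : d.values.length = d.keys.length := pv_values_len
          have hle := pv_size_le15 hd ho16 hgo
          simp at this
          omega
      obtain ⟨h', hfold, hspec⟩ := pv_inner_go q v pvFull16 pv_full16_nodup (fun o ho => ho)
        (pvEntP d done) ch hne
      rw [hfold]
      have hstate : pvShapeD h' = pvShapeD (pvEntP d (done ++ [q])) := by
        apply pv_shapeD_congr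
        intro k hk16
        rw [hspec k]
        have hvals' : pvVals d (done ++ [q]) = pvVals d done ++ [v] := by
          rw [pvVals, List.filterMap_append]
          simp [pvVals, hgq]
        by_cases hkq : k = q
        · subst hkq
          rw [if_neg (by rintro ⟨-, hne', -⟩; exact hne' rfl)]
          simp only [pvEntP, hgq]
        · cases hgk : d.get? k with
          | some w =>
            have hcond : ¬(k ∈ pvFull16 ∧ k ≠ q ∧ v ∈ pvEntP d done k) := by
              rintro ⟨-, -, hvin⟩
              rw [pvEntP, hgk] at hvin
              simp at hvin
              exact hkq (pv_get_inj hd hgk (hvin ▸ hgq))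
            rw [if_neg hcond, pvEntP, pvEntP, hgk]
          | none =>
            have hvin : v ∈ pvEntP d done k := by
              rw [pvEntP, hgk]
              simp [List.mem_filter, hv16, List.contains_iff_mem]
              exact pv_vals_not_mem hd hqdone hgq
            rw [if_pos ⟨hk16, hkq, hvin⟩, pvEntP, pvEntP, hgk, hvals', pv_filter_erase]
      rw [hstate]
      exact ih (done ++ [q]) hsplit' _
    | none =>
      have hlenq := pv_entP_len hd hdone hgq
      by_cases hL : (pvVals d done).length = 15
      · -- the unique forced singleton: its value is pinned nowhere, so the inner loop is a no-op
        have hlen1 : (pvEntP d done q).length = 1 := by omega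
        rcases List.length_eq_one_iff.mp hlen1 with ⟨x, hx⟩
        rw [hx]
        simp only [List.length_cons, List.length_nil, List.headD_cons]
        rw [show ((1 == 1) = true) from rfl]
        simp only [if_true]
        rw [pvDiscardInner, pv_shapeD_keys]
        have hsize := pv_L15_size hd hdone hq16 hgq hL
        have hxmem : x ∈ pvEntP d done q := by rw [hx]; simp
        have hx16 : x ∈ pvFull16 := by
          rw [pvEntP, hgq] at hxmem
          exact (List.mem_filter.mp hxmem).1
        have hxnv : x ∉ pvVals d done := by
          rw [pvEntP, hgq] at hxmem
          have := (List.mem_filter.mp hxmem).2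
          simpa [List.contains_iff_mem] using this
        have hnoop : ∀ o ∈ pvFull16, ¬(o ≠ q ∧ x ∈ pvEntP d done o) := by
          rintro o ho16 ⟨hoq, hxin⟩
          cases hgo : d.get? o with
          | some w =>
            rw [pvEntP, hgo] at hxin
            simp at hxin
            have hw : w ∈ pvVals d done :=
              pv_vals_exhaust hd hdone hq16 hgq hL w ((pv_mem_values hd w).mpr ⟨o, hgo⟩)
            exact hxnv (hxin ▸ hw)
          | none =>
            exact hoq (pv_unique_unpinned hd hsize ho16 hq16 hgo hgq)
        obtain ⟨h', hfold, hspec⟩ := pv_inner_go q x pvFull16 pv_full16_nodup (fun o ho => ho)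
          (pvEntP d done) ch (fun o ho hoq hxin => absurd ⟨hoq, hxin⟩ (hnoop o ho))
        rw [hfold]
        have hany : (pvFull16.any (fun o => decide (o ≠ q) && decide (x ∈ pvEntP d done o))) = false := by
          rw [List.any_eq_false]
          intro o ho
          have := hnoop o ho
          simp only [Bool.and_eq_true, decide_eq_true_eq]
          tauto
        rw [hany, Bool.or_false]
        have hstate : pvShapeD h' = pvShapeD (pvEntP d (done ++ [q])) := by
          apply pv_shapeD_congr
          intro k hk16
          rw [hspec k]
          have hvals' : pvVals d (done ++ [q]) = pvVals d done := by
            rw [pvVals, List.filterMap_append]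
            simp [pvVals, hgq]
          have hcond : ¬(k ∈ pvFull16 ∧ k ≠ q ∧ x ∈ pvEntP d done k) := by
            rintro ⟨-, hkq, hxin⟩
            exact hnoop k hk16 ⟨hkq, hxin⟩
          rw [if_neg hcond, pvEntP, pvEntP, hvals']
        rw [hstate]
        exact ih (done ++ [q]) hsplit' _
      · -- more than one candidate left: skipped
        have hne1 : (pvEntP d done q).length ≠ 1 := by omega
        rw [show ((pvEntP d done q).length == 1) = false from by
          rw [beq_eq_false_iff_ne]; exact hne1]
        simp only [Bool.false_eq_true, if_false]
        have hstate : pvShapeD (pvEntP d done) = pvShapeD (pvEntP d (done ++ [q])) := by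
          apply pv_shapeD_congr
          intro k hk16
          have hvals' : pvVals d (done ++ [q]) = pvVals d done := by
            rw [pvVals, List.filterMap_append]
            simp [pvVals, hgq]
          rw [pvEntP, pvEntP, hvals']
        rw [hstate]
        exact ih (done ++ [q]) hsplit' _

theorem pv_values_sub16 {d : PySem.Dict Int Int} (hd : PvDOK d) :
    ∀ x ∈ d.values, x ∈ pvFull16 := by
  intro x hx
  rcases (pv_mem_values hd x).mp hx with ⟨k, hk⟩
  exact (pv_mem_full16 x).2 (pv_get_range hd hk).2

theorem pv_ent2_len {d : PySem.Dict Int Int} (hd : PvDOK d) {q : Int}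
    (hq : d.get? q = none) : (pvEnt2 d q).length + d.values.length = 16 := by
  rw [pvEnt2, hq]
  have := pv_filter_not_mem_length pvFull16 d.values pv_full16_nodup
    (pv_values_nodup hd) (pv_values_sub16 hd)
  simpa [pvFull16] using this

-- a second pass over the propagated state changes nothing (the loop's exit pass)
theorem pv_pass2_go {d : PySem.Dict Int Int} (hd : PvDOK d) (rest : List Int)
    (hsub : ∀ q ∈ rest, q ∈ pvFull16) (ch : Bool) :
    (rest.foldl (fun acc q =>
        acc.bind (fun (s : List (Int × List Int) × Bool) =>
          let vs := (pvAGet s.1 q).getD []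
          if vs.length == 1 then pvDiscardInner s.1 s.2 q (vs.headD 0)
          else some s)) (some (pvShapeD (pvEnt2 d), ch)))
      = some (pvShapeD (pvEnt2 d), ch) := by
  induction rest generalizing ch with
  | nil => rfl
  | cons q rest' ih =>
    have hq16 := hsub q (by simp)
    have hget : pvAGet (pvShapeD (pvEnt2 d)) q = some (pvEnt2 d q) := by
      rw [pvShapeD, pv_aget_map, if_pos hq16]
    rw [List.foldl_cons, Option.bind_some]
    simp only [hget, Option.getD_some]
    have main : ∀ locked, locked ∈ pvEnt2 d q →
        (∀ o ∈ pvFull16, ¬(o ≠ q ∧ locked ∈ pvEnt2 d o)) →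
        pvDiscardInner (pvShapeD (pvEnt2 d)) ch q locked = some (pvShapeD (pvEnt2 d), ch) := by
      intro locked _ hnoop
      rw [pvDiscardInner, pv_shapeD_keys]
      obtain ⟨h', hfold, hspec⟩ := pv_inner_go q locked pvFull16 pv_full16_nodup (fun o ho => ho)
        (pvEnt2 d) ch (fun o ho hoq hxin => absurd ⟨hoq, hxin⟩ (hnoop o ho))
      rw [hfold]
      have hany : (pvFull16.any (fun o => decide (o ≠ q) && decide (locked ∈ pvEnt2 d o))) = false := by
        rw [List.any_eq_false]
        intro o ho
        have := hnoop o ho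
        simp only [Bool.and_eq_true, decide_eq_true_eq]
        tauto
      rw [hany, Bool.or_false]
      have hstate : pvShapeD h' = pvShapeD (pvEnt2 d) := by
        apply pv_shapeD_congr
        intro k hk16
        rw [hspec k]
        exact if_neg (by rintro ⟨-, hkq, hxin⟩; exact hnoop k hk16 ⟨hkq, hxin⟩)
      rw [hstate]
    cases hgq : d.get? q with
    | some v =>
      have hent : pvEnt2 d q = [v] := by rw [pvEnt2, hgq]
      rw [hent]
      simp only [List.length_cons, List.length_nil, List.headD_cons]
      rw [show ((1 == 1) = true) from rfl]
      simp only [if_true]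
      have hnoop : ∀ o ∈ pvFull16, ¬(o ≠ q ∧ v ∈ pvEnt2 d o) := by
        rintro o ho16 ⟨hoq, hvin⟩
        cases hgo : d.get? o with
        | some w =>
          rw [pvEnt2, hgo] at hvin
          simp at hvin
          exact hoq (pv_get_inj hd hgo (hvin ▸ hgq))
        | none =>
          rw [pvEnt2, hgo] at hvin
          have := (List.mem_filter.mp hvin).2
          simp [List.contains_iff_mem] at this
          exact this ((pv_mem_values hd v).mpr ⟨q, hgq⟩)
      rw [main v (by rw [hent]; simp) hnoop]
      exact ih (fun x hx => hsub x (by simp [hx])) ch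
    | none =>
      have hlenq := pv_ent2_len hd hgq
      by_cases hsz : d.values.length = 15
      · have hlen1 : (pvEnt2 d q).length = 1 := by omega
        rcases List.length_eq_one_iff.mp hlen1 with ⟨x, hx⟩
        have hxmem : x ∈ pvEnt2 d q := by rw [hx]; simp
        have hx16 : x ∈ pvFull16 := by
          rw [pvEnt2, hgq] at hxmem
          exact (List.mem_filter.mp hxmem).1
        have hxnv : x ∉ d.values := by
          rw [pvEnt2, hgq] at hxmem
          have := (List.mem_filter.mp hxmem).2
          simpa [List.contains_iff_mem] using this
        have hsize : d.keys.length = 15 := by rw [← pv_values_len]; exact hsz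
        have hnoop : ∀ o ∈ pvFull16, ¬(o ≠ q ∧ x ∈ pvEnt2 d o) := by
          rintro o ho16 ⟨hoq, hxin⟩
          cases hgo : d.get? o with
          | some w =>
            rw [pvEnt2, hgo] at hxin
            simp at hxin
            exact hxnv (hxin ▸ (pv_mem_values hd w).mpr ⟨o, hgo⟩)
          | none =>
            exact hoq (pv_unique_unpinned hd hsize ho16 hq16 hgo hgq)
        rw [hx]
        simp only [List.length_cons, List.length_nil, List.headD_cons]
        rw [show ((1 == 1) = true) from rfl]
        simp only [if_true]
        rw [main x hxmem hnoop]
        exact ih (fun x hx => hsub x (by simp [hx])) ch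
      · have hne1 : (pvEnt2 d q).length ≠ 1 := by omega
        rw [show ((pvEnt2 d q).length == 1) = false from by
          rw [beq_eq_false_iff_ne]; exact hne1]
        simp only [Bool.false_eq_true, if_false]
        exact ih (fun x hx => hsub x (by simp [hx])) ch

theorem pv_ent_eq_entP_nil (d : PySem.Dict Int Int) (k : Int) :
    pvEnt d k = pvEntP d [] k := by
  rw [pvEnt, pvEntP]
  cases d.get? k with
  | some v => rfl
  | none => simp [pvVals]

theorem pv_entP_full_eq_ent2 {d : PySem.Dict Int Int} (hd : PvDOK d) (k : Int) :
    pvEntP d pvFull16 k = pvEnt2 d k := by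
  rw [pvEntP, pvEnt2]
  cases d.get? k with
  | some v => rfl
  | none =>
    apply List.filter_congr
    intro x hx
    have : x ∈ pvVals d pvFull16 ↔ x ∈ d.values := by
      constructor
      · exact fun h => pv_vals_sub_values hd x h
      · intro h
        rcases (pv_mem_values hd x).mp h with ⟨kk, hkk⟩
        exact (pv_vals_mem x).mpr ⟨kk, (pv_mem_full16 kk).2 (pv_get_range hd hkk).1, hkk⟩
    by_cases hm : x ∈ d.values <;>
      simp [List.contains_iff_mem, hm, this]

theorem pv_pass1 {d : PySem.Dict Int Int} (hd : PvDOK d) (ch : Bool) :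
    ∃ ch', pvPassPos (pvShapeD (pvEnt d)) ch = some (pvShapeD (pvEnt2 d), ch') := by
  have h0 : pvShapeD (pvEnt d) = pvShapeD (pvEntP d []) :=
    pv_shapeD_congr _ _ (fun k _ => pv_ent_eq_entP_nil d k)
  rw [pvPassPos, pv_shapeD_keys, h0]
  obtain ⟨ch', hch⟩ := pv_pass1_go hd [] pvFull16 rfl ch
  rw [hch, pv_shapeD_congr _ _ (fun k _ => pv_entP_full_eq_ent2 hd k)]
  exact ⟨ch', rfl⟩

theorem pv_pass2 {d : PySem.Dict Int Int} (hd : PvDOK d) (ch : Bool) :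
    pvPassPos (pvShapeD (pvEnt2 d)) ch = some (pvShapeD (pvEnt2 d), ch) := by
  rw [pvPassPos, pv_shapeD_keys]
  exact pv_pass2_go hd pvFull16 (fun q hq => hq) ch

theorem pv_passall1 {d0 d1 d2 d3 : PySem.Dict Int Int}
    (h0 : PvDOK d0) (h1 : PvDOK d1) (h2 : PvDOK d2) (h3 : PvDOK d3) :
    ∃ ch, pvPassAll [pvShapeD (pvEnt d0), pvShapeD (pvEnt d1), pvShapeD (pvEnt d2), pvShapeD (pvEnt d3)]
      = some ([pvShapeD (pvEnt2 d0), pvShapeD (pvEnt2 d1), pvShapeD (pvEnt2 d2), pvShapeD (pvEnt2 d3)], ch) := by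
  obtain ⟨c0, e0⟩ := pv_pass1 h0 false
  obtain ⟨c1, e1⟩ := pv_pass1 h1 c0
  obtain ⟨c2, e2⟩ := pv_pass1 h2 c1
  obtain ⟨c3, e3⟩ := pv_pass1 h3 c2
  refine ⟨c3, ?_⟩
  rw [pvPassAll, show PySem.List.pyRange 0 4 1 = [0, 1, 2, 3] from by decide]
  simp only [List.foldl_cons, List.foldl_nil, Option.bind_some, List.getD,
    List.getElem?_cons_zero, List.getElem?_cons_succ, Int.toNat_zero, Int.toNat_one,
    show ((2:Int).toNat) = 2 from rfl, show ((3:Int).toNat) = 3 from rfl, List.set,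
    Option.getD_some]
  rw [e0]
  simp only [Option.bind_some, List.set, List.getD, List.getElem?_cons_zero,
    List.getElem?_cons_succ, Option.getD_some]
  rw [e1]
  simp only [Option.bind_some, List.set, List.getD, List.getElem?_cons_zero,
    List.getElem?_cons_succ, Option.getD_some]
  rw [e2]
  simp only [Option.bind_some, List.set, List.getD, List.getElem?_cons_zero,
    List.getElem?_cons_succ, Option.getD_some]
  rw [e3]
  rfl

theorem pv_passall2 {d0 d1 d2 d3 : PySem.Dict Int Int}
    (h0 : PvDOK d0) (h1 : PvDOK d1) (h2 : PvDOK d2) (h3 : PvDOK d3) :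
    pvPassAll [pvShapeD (pvEnt2 d0), pvShapeD (pvEnt2 d1), pvShapeD (pvEnt2 d2), pvShapeD (pvEnt2 d3)]
      = some ([pvShapeD (pvEnt2 d0), pvShapeD (pvEnt2 d1), pvShapeD (pvEnt2 d2), pvShapeD (pvEnt2 d3)], false) := by
  rw [pvPassAll, show PySem.List.pyRange 0 4 1 = [0, 1, 2, 3] from by decide]
  simp only [List.foldl_cons, List.foldl_nil, Option.bind_some, List.getD,
    List.getElem?_cons_zero, List.getElem?_cons_succ, Int.toNat_zero, Int.toNat_one,
    show ((2:Int).toNat) = 2 from rfl, show ((3:Int).toNat) = 3 from rfl, List.set,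
    Option.getD_some]
  rw [pv_pass2 h0 false]
  simp only [Option.bind_some, List.set, List.getD, List.getElem?_cons_zero,
    List.getElem?_cons_succ, Option.getD_some]
  rw [pv_pass2 h1 false]
  simp only [Option.bind_some, List.set, List.getD, List.getElem?_cons_zero,
    List.getElem?_cons_succ, Option.getD_some]
  rw [pv_pass2 h2 false]
  simp only [Option.bind_some, List.set, List.getD, List.getElem?_cons_zero,
    List.getElem?_cons_succ, Option.getD_some]
  rw [pv_pass2 h3 false]
  rfl

theorem pv_prop_succ (f : Nat) (st : List (List (Int × List Int))) :
    pvPropLoop (f + 1) st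
      = match pvPassAll st with
        | none => none
        | some (st', ch) => if ch then pvPropLoop f st' else some st' := rfl

theorem pv_prop {d0 d1 d2 d3 : PySem.Dict Int Int}
    (h0 : PvDOK d0) (h1 : PvDOK d1) (h2 : PvDOK d2) (h3 : PvDOK d3) :
    pvPropLoop 1025 [pvShapeD (pvEnt d0), pvShapeD (pvEnt d1), pvShapeD (pvEnt d2), pvShapeD (pvEnt d3)]
      = some [pvShapeD (pvEnt2 d0), pvShapeD (pvEnt2 d1), pvShapeD (pvEnt2 d2), pvShapeD (pvEnt2 d3)] := by
  obtain ⟨ch, hp1⟩ := pv_passall1 h0 h1 h2 h3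
  have hp2 := pv_passall2 h0 h1 h2 h3
  rw [show (1025:Nat) = 1024 + 1 from rfl, pv_prop_succ, hp1]
  cases ch
  · rfl
  · show pvPropLoop 1024
        [pvShapeD (pvEnt2 d0), pvShapeD (pvEnt2 d1), pvShapeD (pvEnt2 d2), pvShapeD (pvEnt2 d3)] = _
    rw [show (1024:Nat) = 1023 + 1 from rfl, pv_prop_succ, hp2]
    rfl

-- ---------- final construction ----------
theorem pv_ofList_nodup (l : List Int) (h : l.Nodup) : PySem.Set.ofList l = l := by
  suffices H : ∀ (s : List Int), l.Nodup → (∀ x ∈ l, x ∉ s) → List.foldl PySem.Set.add s l = s ++ l by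
    simpa [PySem.Set.ofList] using H [] h (by simp)
  clear h
  induction l with
  | nil => intro s _ _; simp
  | cons x t ih =>
    intro s hnd hdisj
    have hxs : x ∉ s := hdisj x (by simp)
    rw [List.foldl_cons, show PySem.Set.add s x = s ++ [x] from by
      rw [PySem.Set.add, if_neg (by simp [List.contains_iff_mem, hxs])]]
    rw [ih (s ++ [x]) (List.nodup_cons.mp hnd).2 (fun y hy => by
      simp only [List.mem_append, List.mem_singleton]
      rintro (h | h)
      · exact hdisj y (by simp [hy]) h
      · exact (List.nodup_cons.mp hnd).1 (h ▸ hy))]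
    simp

-- m0's key test is the dict's key test
theorem pv_m0_any (D : PySem.Dict Int Int) (pid : Int) (hp16 : pid ∈ pvFull16) :
    (pvFull16.filterMap (fun k => (D.get? k).map (fun v => (k, v)))).any (fun e => e.1 == pid)
      = D.contains pid := by
  rw [PySem.Dict.contains_eq_isSome_get?]
  cases hg : D.get? pid with
  | some v =>
    have hmem : (pid, v) ∈ pvFull16.filterMap (fun k => (D.get? k).map (fun w => (k, w))) := by
      rw [List.mem_filterMap]
      exact ⟨pid, hp16, by rw [hg]; rfl⟩
    simp only [Option.isSome_some]
    rw [List.any_eq_true]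
    exact ⟨(pid, v), hmem, by simp⟩
  | none =>
    simp only [Option.isSome_none]
    rw [List.any_eq_false]
    intro e he
    rcases List.mem_filterMap.mp he with ⟨k, _, hk⟩
    cases hgk : D.get? k with
    | none => rw [hgk] at hk; cases hk
    | some w =>
      rw [hgk] at hk
      simp only [Option.map_some, Option.some_inj] at hk
      subst hk
      simp only [beq_iff_eq]
      intro hkp
      rw [hkp, hg] at hgk
      cases hgk

theorem pv_build {pair_rows : List (Int × Int × Int × Int)} {rank : List Int} {p : Int}
    {d : PySem.Dict Int Int} (hd : PvDOK d) :
    pvBuildB pair_rows rank p d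
      = some (pvBuildA rank (PySem.Dict.counter (pair_rows.map (fun r => pvTup4 r p)))
          (pvShapeD (pvEnt2 d))) := by
  have hvnd := pv_values_nodup hd
  have hofl : PySem.Set.ofList d.values = d.values := pv_ofList_nodup _ hvnd
  have hvklen : d.values.length = d.keys.length := pv_values_len
  have hsize : PySem.Dict.size d = d.keys.length := by
    simp [PySem.Dict.size, PySem.Dict.keys]
  have hrange16 : PySem.List.pyRange 0 16 1 = pvFull16 := by decide
  simp only [pvBuildB, pvBuildA, pvShapeD, hofl, hrange16, List.filterMap_map,
    show ∀ (ss : PySem.Set Int) (x : Int), PySem.Set.contains ss x = List.contains ss x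
      from fun _ _ => rfl, Function.comp_def]
  rw [if_neg (by rw [hvklen, hsize]; exact fun h => h rfl)]
  have hm0A : ∀ (D : PySem.Dict Int Int),
      (∀ k ∈ pvFull16, (if ((pvEnt2 d k).length == 1) = true
            then some (k, (pvEnt2 d k).headD 0) else none)
          = (D.get? k).map (fun v => (k, v))) →
      pvFull16.filterMap (fun k => if ((pvEnt2 d k).length == 1) = true
            then some (k, (pvEnt2 d k).headD 0) else none)
        = pvFull16.filterMap (fun k => (D.get? k).map (fun v => (k, v))) := by
    intro D hpt
    apply List.filterMap_congr
    intro k hk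
    exact hpt k hk
  by_cases h15 : d.keys.length = 15
  · -- the bijection-forced completion
    rw [show ((PySem.Dict.size d == 15) = true) from by rw [hsize]; simp [h15]]
    simp only [if_true]
    -- the missing pair-id
    cases hfp : pvFull16.find? (fun i => !(d.contains i)) with
    | none =>
      exfalso
      have hall : ∀ k ∈ pvFull16, d.contains k = true := by
        intro k hk
        have := List.find?_eq_none.mp hfp k hk
        simpa using this
      have hsub : pvFull16 ⊆ d.keys := by
        intro k hk
        have := hall k hk
        rw [PySem.Dict.contains_eq_isSome_get?] at this
        rcases Option.isSome_iff_exists.mp this with ⟨v, hv⟩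
        exact (pv_keys_mem_iff k).mpr ⟨v, hv⟩
      have := (List.Nodup.subperm pv_full16_nodup hsub).length_le
      simp [pvFull16] at this
      omega
    | some mp =>
      have hmp16 : mp ∈ pvFull16 := List.mem_of_find?_eq_some hfp
      have hmpg : d.get? mp = none := by
        have := List.find?_some hfp
        simp only [Bool.not_eq_true'] at this
        rw [PySem.Dict.contains_eq_isSome_get?] at this
        exact Option.not_isSome_iff_eq_none.mp (by simp [this])
      -- the missing nibble: the unique candidate left in the forced entry
      have hlenF := pv_ent2_len hd hmpg
      have hlen1 : (pvEnt2 d mp).length = 1 := by omega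
      rcases List.length_eq_one_iff.mp hlen1 with ⟨mv, hmv⟩
      have hmvF : mv ∈ pvFull16.filter (fun x => !(d.values.contains x)) := by
        have : mv ∈ pvEnt2 d mp := by rw [hmv]; simp
        rw [pvEnt2, hmpg] at this
        exact this
      have hfv : pvFull16.find? (fun v => !(d.values.contains v)) = some mv := by
        rw [← List.head?_filter]
        have : pvFull16.filter (fun x => !(d.values.contains x)) = [mv] := by
          have hF := pvEnt2 d mp
          have : pvEnt2 d mp = pvFull16.filter (fun x => !(d.values.contains x)) := by
            rw [pvEnt2, hmpg]
          rw [← this, hmv]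
        rw [this]
        rfl
      rw [hfv]
      simp only [Option.bind_some]
      have hmv16 : mv ∈ pvFull16 := (List.mem_filter.mp hmvF).1
      have hmvnv : mv ∉ d.values := by
        have := (List.mem_filter.mp hmvF).2
        simpa [List.contains_iff_mem] using this
      have hadd : PySem.Set.add d.values mv = d.values ++ [mv] := by
        rw [PySem.Set.add, if_neg (by simp [List.contains_iff_mem, hmvnv])]
      rw [hadd]
      -- m0 agreement
      rw [hm0A (d.insert mp mv) ?hpt]
      case hpt =>
        intro k hk16
        cases hgk : d.get? k with
        | some v =>
          have hkmp : k ≠ mp := fun he => by rw [he, hmpg] at hgk; cases hgk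
          rw [PySem.Dict.get?_insert_of_ne d mv hkmp, hgk]
          simp only [Option.map_some]
          have : pvEnt2 d k = [v] := by rw [pvEnt2, hgk]
          simp [this]
        | none =>
          have hkmp : k = mp := pv_unique_unpinned hd h15 hk16 hmp16 hgk hmpg
          subst hkmp
          rw [PySem.Dict.get?_insert_self]
          simp only [Option.map_some]
          have : pvEnt2 d k = [mv] := by rw [pvEnt2, hgk, ← hmv, pvEnt2, hmpg]
          simp [this]
      -- unresolved agreement
      have hunres : pvFull16.filter (fun pid =>
            !((pvFull16.filterMap (fun k => ((d.insert mp mv).get? k).map (fun v => (k, v)))).any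
              (fun e => e.1 == pid)))
          = pvFull16.filter (fun pid => !((d.insert mp mv).contains pid)) := by
        apply List.filter_congr
        intro pid hpid
        rw [pv_m0_any (d.insert mp mv) pid hpid]
      rw [hunres]
      -- used agreement
      have hused : ∀ nb : Int,
          (List.contains (PySem.Set.ofList ((pvFull16.filterMap (fun k => ((d.insert mp mv).get? k).map
              (fun v => (k, v)))).map (fun e => e.2))) nb)
            = ((d.values ++ [mv]).contains nb) := by
        intro nb
        have hiff : nb ∈ (pvFull16.filterMap (fun k => ((d.insert mp mv).get? k).map
            (fun v => (k, v)))).map (fun e => e.2) ↔ nb ∈ d.values ++ [mv] := by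
          constructor
          · intro hmem
            rcases List.mem_map.mp hmem with ⟨e, he, hnb⟩
            rcases List.mem_filterMap.mp he with ⟨k, hk16, hk⟩
            cases hgk : (d.insert mp mv).get? k with
            | none => rw [hgk] at hk; cases hk
            | some w =>
              rw [hgk] at hk
              simp only [Option.map_some, Option.some_inj] at hk
              subst hk
              simp only at hnb
              subst hnb
              by_cases hkmp : k = mp
              · subst hkmp
                rw [PySem.Dict.get?_insert_self] at hgk
                simp only [Option.some_inj] at hgk
                simp [hgk]
              · rw [PySem.Dict.get?_insert_of_ne d mv hkmp] at hgk
                simp only [List.mem_append]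
                exact Or.inl ((pv_mem_values hd _).mpr ⟨k, hgk⟩)
          · intro hmem
            rcases List.mem_append.mp hmem with h | h
            · rcases (pv_mem_values hd nb).mp h with ⟨k, hk⟩
              have hk16 : k ∈ pvFull16 := (pv_mem_full16 k).2 (pv_get_range hd hk).1
              have hkmp : k ≠ mp := fun he => by rw [he, hmpg] at hk; cases hk
              refine List.mem_map.mpr ⟨(k, nb), List.mem_filterMap.mpr ⟨k, hk16, ?_⟩, rfl⟩
              rw [PySem.Dict.get?_insert_of_ne d mv hkmp, hk]
              rfl
            · simp only [List.mem_singleton] at h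
              subst h
              refine List.mem_map.mpr ⟨(mp, nb), List.mem_filterMap.mpr ⟨mp, hmp16, ?_⟩, rfl⟩
              rw [PySem.Dict.get?_insert_self]
              rfl
        by_cases hm : nb ∈ d.values ++ [mv] <;>
          simp [List.contains_iff_mem, PySem.Set.mem_ofList, hm, hiff]
      have hfree : rank.filter (fun nb =>
            !(List.contains (PySem.Set.ofList ((pvFull16.filterMap (fun k => ((d.insert mp mv).get? k).map
              (fun v => (k, v)))).map (fun e => e.2))) nb))
          = rank.filter (fun nb => !((d.values ++ [mv]).contains nb)) := by
        apply List.filter_congr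
        intro nb _
        rw [hused nb]
      rw [hfree]
  · -- no completion
    rw [show ((PySem.Dict.size d == 15) = false) from by
      rw [hsize, beq_eq_false_iff_ne]; exact h15]
    simp only [Bool.false_eq_true, if_false, Option.bind_some]
    rw [hm0A d ?hpt2]
    case hpt2 =>
      intro k hk16
      cases hgk : d.get? k with
      | some v =>
        simp only [Option.map_some]
        have : pvEnt2 d k = [v] := by rw [pvEnt2, hgk]
        simp [this]
      | none =>
        simp only [Option.map_none]
        have hlenF := pv_ent2_len hd hgk
        have hsle := pv_size_le15 hd hk16 hgk
        have : (pvEnt2 d k).length ≠ 1 := by omega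
        simp only [beq_eq_false_iff_ne.mpr this, Bool.false_eq_true, if_false]
    have hunres : pvFull16.filter (fun pid =>
          !((pvFull16.filterMap (fun k => (d.get? k).map (fun v => (k, v)))).any
            (fun e => e.1 == pid)))
        = pvFull16.filter (fun pid => !(d.contains pid)) := by
      apply List.filter_congr
      intro pid hpid
      rw [pv_m0_any d pid hpid]
    rw [hunres]
    have hused : ∀ nb : Int,
        (List.contains (PySem.Set.ofList ((pvFull16.filterMap (fun k => (d.get? k).map
            (fun v => (k, v)))).map (fun e => e.2))) nb)
          = (d.values.contains nb) := by
      intro nb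
      have hiff : nb ∈ (pvFull16.filterMap (fun k => (d.get? k).map
          (fun v => (k, v)))).map (fun e => e.2) ↔ nb ∈ d.values := by
        constructor
        · intro hmem
          rcases List.mem_map.mp hmem with ⟨e, he, hnb⟩
          rcases List.mem_filterMap.mp he with ⟨k, hk16, hk⟩
          cases hgk : d.get? k with
          | none => rw [hgk] at hk; cases hk
          | some w =>
            rw [hgk] at hk
            simp only [Option.map_some, Option.some_inj] at hk
            subst hk
            simp only at hnb
            subst hnb
            exact (pv_mem_values hd _).mpr ⟨k, hgk⟩
        · intro hmem
          rcases (pv_mem_values hd nb).mp hmem with ⟨k, hk⟩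
          have hk16 : k ∈ pvFull16 := (pv_mem_full16 k).2 (pv_get_range hd hk).1
          refine List.mem_map.mpr ⟨(k, nb), List.mem_filterMap.mpr ⟨k, hk16, ?_⟩, rfl⟩
          rw [hk]
          rfl
      by_cases hm : nb ∈ d.values <;>
        simp [List.contains_iff_mem, PySem.Set.mem_ofList, hm, hiff]
    have hfree : rank.filter (fun nb =>
          !(List.contains (PySem.Set.ofList ((pvFull16.filterMap (fun k => (d.get? k).map
            (fun v => (k, v)))).map (fun e => e.2))) nb))
        = rank.filter (fun nb => !(d.values.contains nb)) := by
      apply List.filter_congr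
      intro nb _
      rw [hused nb]
    rw [hfree]

-- ---------- frequency counters ----------
theorem pv_posfreq_go (rows : List (Int × Int × Int × Int)) (f0 f1 f2 f3 : PySem.Dict Int Int) :
    rows.foldl (fun fs r =>
      (PySem.List.pyRange 0 4 1).foldl (fun fs p =>
        fs.set p.toNat ((fs.getD p.toNat PySem.Dict.empty).modify (pvTup4 r p) 0 (· + 1))) fs)
      [f0, f1, f2, f3]
    = [(rows.map (fun r => pvTup4 r 0)).foldl (fun d x => d.modify x 0 (· + 1)) f0,
       (rows.map (fun r => pvTup4 r 1)).foldl (fun d x => d.modify x 0 (· + 1)) f1,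
       (rows.map (fun r => pvTup4 r 2)).foldl (fun d x => d.modify x 0 (· + 1)) f2,
       (rows.map (fun r => pvTup4 r 3)).foldl (fun d x => d.modify x 0 (· + 1)) f3] := by
  induction rows generalizing f0 f1 f2 f3 with
  | nil => rfl
  | cons r t ih => exact ih _ _ _ _

theorem pv_posfreq (rows : List (Int × Int × Int × Int)) :
    pvPosFreq rows
      = [PySem.Dict.counter (rows.map (fun r => pvTup4 r 0)),
         PySem.Dict.counter (rows.map (fun r => pvTup4 r 1)),
         PySem.Dict.counter (rows.map (fun r => pvTup4 r 2)),
         PySem.Dict.counter (rows.map (fun r => pvTup4 r 3))] := by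
  rw [pvPosFreq,
    show (PySem.List.pyRange 0 4 1).map (fun _ => (PySem.Dict.empty : PySem.Dict Int Int))
      = [PySem.Dict.empty, PySem.Dict.empty, PySem.Dict.empty, PySem.Dict.empty] from rfl,
    pv_posfreq_go]
  rw [PySem.Dict.counter_eq_foldl, PySem.Dict.counter_eq_foldl, PySem.Dict.counter_eq_foldl,
    PySem.Dict.counter_eq_foldl]

-- ===== VERDICT (by name: the statement is the Claim_ definition above) =====
theorem derive_mappings_spec : Claim_equal_derive_mappings := by
  unfold Claim_equal_derive_mappings
  intro pair_rows anchors nibble_order rank hdom hPre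
  unfold Spec_derive_mappings
  have hOK0 : ∀ pp : Int, PvPosOK pair_rows anchors nibble_order pp PySem.Dict.empty := by
    intro pp
    constructor
    · exact PySem.Dict.nodup_keys_empty
    · intro kv hkv
      simp [PySem.Dict.items, PySem.Dict.empty] at hkv
  obtain ⟨d0, d1, d2, d3, hA, hB, k0, k1, k2, k3⟩ :=
    pv_phase hPre anchors (fun x hx => hx) PySem.Dict.empty PySem.Dict.empty
      PySem.Dict.empty PySem.Dict.empty (hOK0 0) (hOK0 1) (hOK0 2) (hOK0 3)
  have hd0 := pv_posok_dok hPre (by simp) k0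
  have hd1 := pv_posok_dok hPre (by simp) k1
  have hd2 := pv_posok_dok hPre (by simp) k2
  have hd3 := pv_posok_dok hPre (by simp) k3
  have hinit : pvInitCands = [pvShapeD (pvEnt PySem.Dict.empty), pvShapeD (pvEnt PySem.Dict.empty),
      pvShapeD (pvEnt PySem.Dict.empty), pvShapeD (pvEnt PySem.Dict.empty)] := by decide
  -- A side
  rw [derive_mappings, hinit, hA]
  rw [Option.bind_some, pv_prop hd0 hd1 hd2 hd3, Option.map_some, Option.getD_some, pv_posfreq,
    show PySem.List.pyRange 0 4 1 = [0, 1, 2, 3] from by decide]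
  simp only [List.foldl_cons, List.foldl_nil, List.getD, List.getElem?_cons_zero,
    List.getElem?_cons_succ, Int.toNat_zero, Int.toNat_one,
    show ((2:Int).toNat) = 2 from rfl, show ((3:Int).toNat) = 3 from rfl,
    Option.getD_some, List.nil_append]
  -- B side
  rw [derive_mappings_alt, pvPins,
    show (PySem.List.pyRange 0 4 1).map (fun _ => (PySem.Dict.empty : PySem.Dict Int Int))
      = [PySem.Dict.empty, PySem.Dict.empty, PySem.Dict.empty, PySem.Dict.empty] from rfl,
    hB, Option.bind_some, show PySem.List.pyRange 0 4 1 = [0, 1, 2, 3] from by decide]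
  simp only [List.foldl_cons, List.foldl_nil, List.getD, List.getElem?_cons_zero,
    List.getElem?_cons_succ, Int.toNat_zero, Int.toNat_one,
    show ((2:Int).toNat) = 2 from rfl, show ((3:Int).toNat) = 3 from rfl,
    Option.getD_some, List.nil_append, Option.bind_some]
  rw [pv_build (p := 0) hd0]
  simp only [Option.map_some, Option.bind_some]
  rw [pv_build (p := 1) hd1]
  simp only [Option.map_some, Option.bind_some]
  rw [pv_build (p := 2) hd2]
  simp only [Option.map_some, Option.bind_some]
  rw [pv_build (p := 3) hd3]
  simp only [Option.map_some, Option.getD_some, List.nil_append]
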